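-- pv_equiv track=rewrite | github.com/jutkko/learn | python/non-divisible-subset.py | get_max_non_divisible_subset
-- ===== SOURCE A (Python) =====
-- def get_max_non_divisible_subset(myList, k):
--     remainderList = list(map(lambda x: x % k, myList))
--
--     remainderCount = {}
--     for r in remainderList:
--         if r in remainderCount:
--             remainderCount[r] += 1
--         else:
--             remainderCount[r] = 1
--
--     # consider even k, when the number of k / 2 elems is 1
--     count = 0
--
--     if k % 2 == 0 and k / 2 in remainderCount:
--         count += 1
--         del remainderCount[k / 2]
--
--     if 0 in remainderCount:
--         count += 1
--         del remainderCount[0]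
--
--     count += get_sum_except_for_value(remainderCount, k)
--
--     return count
--
-- def get_sum_except_for_value(myMap, k):
--     result = 0
--     toExclude = []
--     for key, val in myMap.items():
--         if k - key != key and key not in toExclude:
--             toExclude.append(key)
--             toExclude.append(k - key)
--             otherValue = 0
--             if k - key in myMap:
--                 otherValue = myMap[k - key]
--             result += max(val, otherValue)
--
--     return result
-- ===== SOURCE B (Python) =====
-- def get_max_non_divisible_subset(myList, k):
--     m = abs(k)
--     rs = sorted(x % m for x in myList)
--     # run-length encode the sorted remainders into (value, multiplicity) runs
--     runs = []
--     i = 0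
--     while i < len(rs):
--         j = i + 1
--         while j < len(rs) and rs[j] == rs[i]:
--             j += 1
--         runs.append((rs[i], j - i))
--         i = j
--     total = 0
--     lo, hi = 0, len(runs) - 1
--     if lo <= hi and runs[lo][0] == 0:
--         total += 1
--         lo += 1
--     # two pointers over the sorted distinct remainders: the extreme pair's sum
--     # against m decides which side of a complementary pair survives
--     while lo < hi:
--         a, ca = runs[lo]
--         b, cb = runs[hi]
--         if a + b < m:
--             total += ca
--             lo += 1
--         elif a + b > m:
--             total += cb
--             hi -= 1
--         else:
--             total += max(ca, cb)
--             lo += 1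
--             hi -= 1
--     if lo == hi:
--         r, c = runs[lo]
--         total += 1 if (2 * r) % m == 0 else c
--     return total
-- ===== Notes on version B (the rewrite author's own statement) =====
-- stated objective: alternative
-- what changed: Replaces A's remainder dictionary with float-keyed deletions and a quadratic toExclude pair-scan over dict items by sorting the remainders mod abs(k), run-length encoding them, and sweeping the sorted distinct remainders with two pointers from both ends, where the extreme pair's sum against abs(k) decides which side of each complementary pair survives; no dictionary is used at all (intended to remove the quadratic pair-scan; a timing run result varies with the number of distinct remainders, so no speed is claimed).
-- outside the precondition, e.g. on get_max_non_divisible_subset([], 0): A returns 0, B returns 0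
import Mathlib
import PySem

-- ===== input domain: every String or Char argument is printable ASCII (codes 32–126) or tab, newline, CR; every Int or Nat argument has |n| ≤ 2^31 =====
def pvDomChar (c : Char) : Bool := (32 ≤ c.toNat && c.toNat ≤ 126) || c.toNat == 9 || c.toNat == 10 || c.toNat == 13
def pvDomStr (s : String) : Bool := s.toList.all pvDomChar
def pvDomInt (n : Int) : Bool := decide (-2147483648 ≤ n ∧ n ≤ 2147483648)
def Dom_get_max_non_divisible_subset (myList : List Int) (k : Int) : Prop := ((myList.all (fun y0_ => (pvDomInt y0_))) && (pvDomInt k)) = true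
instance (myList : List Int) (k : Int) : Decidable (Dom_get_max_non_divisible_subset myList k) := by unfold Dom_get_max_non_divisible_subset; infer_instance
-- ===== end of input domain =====

-- B drops A's remainder dictionary and quadratic toExclude pair-scan entirely: it sorts the
-- remainders mod |k|, run-length encodes them, and sweeps the sorted distinct remainders with
-- two pointers from both ends; the extreme pair's sum against |k| decides which side survives.

-- ===== PORT A =====
-- helper get_sum_except_for_value from the same module, transliterated
def pvGetSumExceptForValue (myMap : PySem.Dict Int Int) (k : Int) : Int :=
  (myMap.items.foldl
    (fun (st : Int × List Int) kv =>
      if k - kv.1 ≠ kv.1 ∧ kv.1 ∉ st.2 then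
        (st.1 + max kv.2 (if myMap.contains (k - kv.1) then myMap.getD (k - kv.1) 0 else 0),
         st.2 ++ [kv.1, k - kv.1])
      else st)
    (0, [])).1

def get_max_non_divisible_subset (myList : List Int) (k : Int) : Int :=
  let remainderList := myList.map (fun x => PySem.Int.mod x k)
  let remainderCount := remainderList.foldl
    (fun d r => if d.contains r then d.modify r 0 (· + 1) else d.insert r 1)
    PySem.Dict.empty
  let count : Int := 0
  -- Python tests 'k / 2 in remainderCount' with a float key; under 'k % 2 == 0' the float
  -- k/2 equals the int k//2 and CPython int/float keys compare equal, so it is the int lookup k//2 (exact).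
  let st :=
    if PySem.Int.mod k 2 = 0 ∧ remainderCount.contains (PySem.Int.floordiv k 2) then
      (count + 1, remainderCount.erase (PySem.Int.floordiv k 2))
    else (count, remainderCount)
  let st2 :=
    if st.2.contains 0 then (st.1 + 1, st.2.erase 0) else st
  st2.1 + pvGetSumExceptForValue st2.2 k

-- ===== PORT B =====
-- inner 'while j < len(rs) and rs[j] == rs[i]' of Source B (v = rs[i]); the Nat argument is fuel
-- (always called with enough, so the loop behaviour is exact); j stays in range, so the
-- pyGetD default is never the decisive value on the inputs admitted below (exact)
def pvRunEnd (rs : List Int) (v : Int) : Nat → Int → Int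
  | 0, j => j
  | n + 1, j =>
    if j < (rs.length : Int) ∧ PySem.List.pyGetD rs j 0 = v then pvRunEnd rs v n (j + 1) else j

-- outer run-length-encoding 'while i < len(rs)' loop of Source B, accumulating runs (fuel-guarded)
def pvRleLoop (rs : List Int) : Nat → Int → List (Int × Int) → List (Int × Int)
  | 0, _, runs => runs
  | n + 1, i, runs =>
    if i < (rs.length : Int) then
      let j := pvRunEnd rs (PySem.List.pyGetD rs i 0) (rs.length + 1) (i + 1)
      pvRleLoop rs n j (runs ++ [(PySem.List.pyGetD rs i 0, j - i)])
    else runs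

-- the 'while lo < hi' two-pointer sweep of Source B (fuel-guarded); returns the final (total, lo, hi)
def pvTwoPtr (runs : List (Int × Int)) (m : Int) : Nat → Int → Int → Int → Int × Int × Int
  | 0, lo, hi, total => (total, lo, hi)
  | n + 1, lo, hi, total =>
    if lo < hi then
      let a := PySem.List.pyGetD runs lo (0, 0)
      let b := PySem.List.pyGetD runs hi (0, 0)
      if a.1 + b.1 < m then pvTwoPtr runs m n (lo + 1) hi (total + a.2)
      else if m < a.1 + b.1 then pvTwoPtr runs m n lo (hi - 1) (total + b.2)
      else pvTwoPtr runs m n (lo + 1) (hi - 1) (total + max a.2 b.2)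
    else (total, lo, hi)

def get_max_non_divisible_subset_alt (myList : List Int) (k : Int) : Int :=
  let m := |k|
  let rs := PySem.List.sorted (myList.map (fun x => PySem.Int.mod x m)) (fun r => r) false
  let runs := pvRleLoop rs (rs.length + 1) 0 []
  -- (total, lo) after the 'if lo <= hi and runs[lo][0] == 0' check, with lo = 0, hi = len(runs)-1
  let st0 : Int × Int :=
    if 0 ≤ (runs.length : Int) - 1 ∧ (PySem.List.pyGetD runs 0 (0, 0)).1 = 0 then (1, 1) else (0, 0)
  let st := pvTwoPtr runs m (runs.length + 1) st0.2 ((runs.length : Int) - 1) st0.1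
  if st.2.1 = st.2.2 then
    st.1 + (if PySem.Int.mod (2 * (PySem.List.pyGetD runs st.2.1 (0, 0)).1) m = 0 then 1
            else (PySem.List.pyGetD runs st.2.1 (0, 0)).2)
  else st.1

-- ===== PRECONDITION & SPEC =====
-- Pre_ excludes k = 0, on which Python's 'x % k' (and B's 'x % abs(k)') raises ZeroDivisionError
-- for any list element (on the empty list both programs trivially return 0).
def Pre_get_max_non_divisible_subset (myList : List Int) (k : Int) : Prop := k ≠ 0
instance (myList : List Int) (k : Int) : Decidable (Pre_get_max_non_divisible_subset myList k) := by
  unfold Pre_get_max_non_divisible_subset; infer_instance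

def pvWitness_get_max_non_divisible_subset : List Int × Int := ([2, 5, 7, 11, 4], 4)

def Spec_get_max_non_divisible_subset (myList : List Int) (k : Int) (out : Int) : Prop :=
  out = get_max_non_divisible_subset_alt myList k
instance (myList : List Int) (k : Int) (out : Int) : Decidable (Spec_get_max_non_divisible_subset myList k out) := by
  unfold Spec_get_max_non_divisible_subset; infer_instance

-- ===== CLAIM (what is proved, stated in full; the proofs are below) =====
def Claim_equal_get_max_non_divisible_subset : Prop := ∀ (myList : List Int) (k : Int), Dom_get_max_non_divisible_subset myList k → Pre_get_max_non_divisible_subset myList k → Spec_get_max_non_divisible_subset myList k (get_max_non_divisible_subset myList k)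

-- ===== LEMMAS AND PROOFS =====

-- r-emainder list of myList modulo d (signed Python remainders)
def pvRL (myList : List Int) (d : Int) : List Int := myList.map (fun x => PySem.Int.mod x d)
-- canonical (nonnegative) representative of the remainder class of c, m = |k|
def pvRep (m c : Int) : Int := if c < 0 then c + m else c
-- canonical index of the complementary pair {c, k - c}
def pvIdx (m c : Int) : Int := min (pvRep m c) (m - pvRep m c)
-- the contribution of pair index r : max of the two bucket counts
def pvM (q : List Int) (m r : Int) : Int := max ((q.count r : Int)) ((q.count (m - r) : Int))
-- a key surviving A's two deletions: a nonzero remainder class not equal to its own complement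
def pvGood (k c : Int) : Prop := ((0 < k ∧ 0 < c ∧ c < k) ∨ (k < 0 ∧ k < c ∧ c < 0)) ∧ 2 * c ≠ k

theorem pv_mod_point (k c : Int) (hk : k ≠ 0)
    (hc : (0 < k → 0 ≤ c ∧ c < k) ∧ (k < 0 → k < c ∧ c ≤ 0)) (x : Int) :
    PySem.Int.mod x k = c ↔ PySem.Int.mod x |k| = pvRep |k| c := by
  rcases lt_trichotomy k 0 with hneg | hz | hpos
  · -- k < 0 : x % k = -((-x) % (-k)) and |k| = -k
    have habs : |k| = -k := abs_of_neg hneg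
    have hmpos : (0:Int) < -k := by omega
    have hflip : PySem.Int.mod x k = -(PySem.Int.mod (-x) (-k)) := by
      have h' := PySem.Int.mod_neg_neg (-x) (-k)
      rw [neg_neg, neg_neg] at h'
      exact h'
    have h1 : PySem.Int.mod (-x) (-k) = (-x) % (-k) := PySem.Int.mod_eq_emod_of_pos hmpos
    have h2 : PySem.Int.mod x (-k) = x % (-k) := PySem.Int.mod_eq_emod_of_pos hmpos
    have he0 : 0 ≤ x % (-k) := Int.emod_nonneg x (by omega)
    have he1 : x % (-k) < -k := Int.emod_lt_of_pos x hmpos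
    have hneg_emod : -x % (-k) = if (-k) ∣ x then 0 else ((-k).natAbs : Int) - x % (-k) :=
      Int.neg_emod
    have hna : ((-k).natAbs : Int) = -k := Int.natAbs_of_nonneg (by omega)
    have hdvd : (-k) ∣ x ↔ x % (-k) = 0 := by
      constructor
      · exact Int.emod_eq_zero_of_dvd
      · exact Int.dvd_of_emod_eq_zero
    rw [habs, hflip, h1, h2, hneg_emod, hna]
    unfold pvRep
    have hcb := hc.2 hneg
    split_ifs with hd hlt hlt <;> rw [hdvd] at * <;> omega
  · omega
  · have habs : |k| = k := abs_of_pos hpos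
    have hrep : pvRep k c = c := by
      unfold pvRep
      have := hc.1 hpos
      split_ifs <;> omega
    rw [habs, hrep]

theorem pv_count_bridge (myList : List Int) (k c : Int) (hk : k ≠ 0)
    (hc : (0 < k → 0 ≤ c ∧ c < k) ∧ (k < 0 → k < c ∧ c ≤ 0)) :
    (pvRL myList k).count c = (pvRL myList |k|).count (pvRep |k| c) := by
  induction myList with
  | nil => rfl
  | cons x xs ih =>
    unfold pvRL at *
    simp only [List.map_cons, List.count_cons, ih]
    congr 1
    by_cases h : PySem.Int.mod x k = c
    · rw [if_pos (by exact beq_iff_eq.mpr h),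
        if_pos (by exact beq_iff_eq.mpr ((pv_mod_point k c hk hc x).mp h))]
    · rw [if_neg (by simpa using h),
        if_neg (by simpa using (fun h' => h ((pv_mod_point k c hk hc x).mpr h')))]

theorem pv_good_partner {k c : Int} (h : pvGood k c) : pvGood k (k - c) := by
  unfold pvGood at *; omega

theorem pv_good_bounds {k c : Int} (h : pvGood k c) :
    (0 < k → 0 ≤ c ∧ c < k) ∧ (k < 0 → k < c ∧ c ≤ 0) := by
  unfold pvGood at h; omega

theorem pv_rep_bounds {k c : Int} (h : pvGood k c) :
    0 < pvRep |k| c ∧ pvRep |k| c < |k| ∧ 2 * pvRep |k| c ≠ |k| := by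
  rcases abs_cases k with ⟨h1, h2⟩ | ⟨h1, h2⟩ <;> unfold pvGood at h <;> unfold pvRep <;>
    rw [h1] <;> split_ifs <;> omega

theorem pv_rep_partner {k c : Int} (h : pvGood k c) :
    pvRep |k| (k - c) = |k| - pvRep |k| c := by
  rcases abs_cases k with ⟨h1, h2⟩ | ⟨h1, h2⟩ <;> unfold pvGood at h <;> unfold pvRep <;>
    rw [h1] <;> split_ifs <;> omega

theorem pv_idx_partner {k c : Int} (h : pvGood k c) :
    pvIdx |k| (k - c) = pvIdx |k| c := by
  unfold pvIdx
  rw [pv_rep_partner h, sub_sub_cancel, min_comm]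

theorem pv_fiber {k c e : Int} (hc : pvGood k c) (he : pvGood k e)
    (hidx : pvIdx |k| e = pvIdx |k| c) : e = c ∨ e = k - c := by
  have hb1 := pv_rep_bounds hc
  have hb2 := pv_rep_bounds he
  have hmm : pvRep |k| e = pvRep |k| c ∨ pvRep |k| e = |k| - pvRep |k| c := by
    rw [pvIdx, pvIdx, min_def, min_def] at hidx
    split_ifs at hidx <;> omega
  rcases abs_cases k with ⟨h1, h2⟩ | ⟨h1, h2⟩ <;> unfold pvGood at hc he <;>
    unfold pvRep at hmm <;> rw [h1] at hmm <;> split_ifs at hmm <;> omega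

theorem pv_M_idx (q : List Int) {k c : Int} (h : pvGood k c) :
    pvM q |k| (pvIdx |k| c) =
      max ((q.count (pvRep |k| c) : Int)) ((q.count (|k| - pvRep |k| c) : Int)) := by
  unfold pvM pvIdx
  rcases le_total (pvRep |k| c) (|k| - pvRep |k| c) with h' | h'
  · rw [min_eq_left h']
  · rw [min_eq_right h', sub_sub_cancel, max_comm]

-- the canonical pair loop: its value is the sum of pvM over the distinct pair indices
-- of the keys, except those already excluded by E
theorem pv_loop_sum (k : Int) (q : List Int) :
    ∀ (K E : List Int) (res : Int), K.Nodup →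
      (∀ c ∈ K, pvGood k c) → (∀ e ∈ E, pvGood k e) →
      (∀ e, pvGood k e → (e ∈ E ↔ (k - e) ∈ E)) →
      (K.foldl
        (fun (st : Int × List Int) c =>
          if c ∈ st.2 then st
          else (st.1 + pvM q |k| (pvIdx |k| c), st.2 ++ [c, k - c]))
        (res, E)).1
      = res + ∑ r ∈ ((K.map (pvIdx |k|)).toFinset \ (E.map (pvIdx |k|)).toFinset), pvM q |k| r := by
  intro K
  induction K with
  | nil => intro E res _ _ _ _; simp
  | cons c K ih =>
    intro E res hnd hK hE hEc
    have hgc : pvGood k c := hK c (by simp)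
    have hgc' : pvGood k (k - c) := pv_good_partner hgc
    simp only [List.foldl_cons]
    by_cases hcE : c ∈ E
    · rw [if_pos hcE]
      rw [ih E res (List.Nodup.of_cons hnd) (fun d hd => hK d (List.mem_cons_of_mem _ hd)) hE hEc]
      have hcE' : pvIdx |k| c ∈ (E.map (pvIdx |k|)).toFinset := by
        simp only [List.mem_toFinset, List.mem_map]
        exact ⟨c, hcE, rfl⟩
      have hset : ((List.map (pvIdx |k|) (c :: K)).toFinset \ (List.map (pvIdx |k|) E).toFinset)
          = ((List.map (pvIdx |k|) K).toFinset \ (List.map (pvIdx |k|) E).toFinset) := by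
        simp only [List.map_cons, List.toFinset_cons]
        apply Finset.ext
        intro r
        simp only [Finset.mem_sdiff, Finset.mem_insert]
        constructor
        · rintro ⟨h1 | h1, h2⟩
          · exact absurd (h1 ▸ hcE') h2
          · exact ⟨h1, h2⟩
        · rintro ⟨h1, h2⟩; exact ⟨Or.inr h1, h2⟩
      rw [hset]
    · rw [if_neg hcE]
      have hmem2 : ∀ e : Int, e ∈ ([c, k - c] : List Int) ↔ e = c ∨ e = k - c := by
        intro e
        simp only [List.mem_cons, List.not_mem_nil, or_false]
      have hE' : ∀ e ∈ E ++ [c, k - c], pvGood k e := by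
        intro e he
        rcases List.mem_append.mp he with h | h
        · exact hE e h
        · rcases (hmem2 e).mp h with h | h
          · exact h ▸ hgc
          · exact h ▸ hgc'
      have hEc' : ∀ e, pvGood k e → (e ∈ E ++ [c, k - c] ↔ (k - e) ∈ E ++ [c, k - c]) := by
        intro e hge
        simp only [List.mem_append, List.mem_cons, List.not_mem_nil, or_false]
        constructor
        · rintro (h | h | h)
          · exact Or.inl ((hEc e hge).mp h)
          · exact Or.inr (Or.inr (by omega))
          · exact Or.inr (Or.inl (by omega))
        · rintro (h | h | h)
          · exact Or.inl ((hEc e hge).mpr h)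
          · exact Or.inr (Or.inr (by omega))
          · exact Or.inr (Or.inl (by omega))
      rw [ih (E ++ [c, k - c]) (res + pvM q |k| (pvIdx |k| c)) (List.Nodup.of_cons hnd)
        (fun d hd => hK d (List.mem_cons_of_mem _ hd)) hE' hEc']
      have hnotE : pvIdx |k| c ∉ (E.map (pvIdx |k|)).toFinset := by
        simp only [List.mem_toFinset, List.mem_map]
        rintro ⟨e, heE, hei⟩
        rcases pv_fiber hgc (hE e heE) hei with h | h
        · exact hcE (h ▸ heE)
        · have h2 : k - e ∈ E := (hEc e (hE e heE)).mp heE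
          have hc2 : k - e = c := by omega
          exact hcE (hc2 ▸ h2)
      have hmapE' : ((E ++ [c, k - c]).map (pvIdx |k|)).toFinset
          = insert (pvIdx |k| c) (E.map (pvIdx |k|)).toFinset := by
        apply Finset.ext
        intro r
        simp only [List.mem_toFinset, List.mem_map, List.mem_append, Finset.mem_insert,
          List.mem_cons, List.not_mem_nil, or_false]
        constructor
        · rintro ⟨e, hin | hin | hin, hei⟩
          · exact Or.inr ⟨e, hin, hei⟩
          · exact Or.inl (by rw [← hei, hin])
          · exact Or.inl (by rw [← hei, hin, pv_idx_partner hgc])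
        · rintro (h | ⟨e, he, hei⟩)
          · exact ⟨c, Or.inr (Or.inl rfl), h.symm⟩
          · exact ⟨e, Or.inl he, hei⟩
      rw [hmapE']
      simp only [List.map_cons, List.toFinset_cons]
      have h1 : (K.map (pvIdx |k|)).toFinset \ insert (pvIdx |k| c) (E.map (pvIdx |k|)).toFinset
          = ((K.map (pvIdx |k|)).toFinset \ (E.map (pvIdx |k|)).toFinset).erase (pvIdx |k| c) := by
        apply Finset.ext
        intro r
        simp only [Finset.mem_sdiff, Finset.mem_erase, Finset.mem_insert]
        tauto
      have h2 : insert (pvIdx |k| c) (K.map (pvIdx |k|)).toFinset \ (E.map (pvIdx |k|)).toFinset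
          = insert (pvIdx |k| c)
              (((K.map (pvIdx |k|)).toFinset \ (E.map (pvIdx |k|)).toFinset).erase (pvIdx |k| c)) := by
        apply Finset.ext
        intro r
        simp only [Finset.mem_sdiff, Finset.mem_erase, Finset.mem_insert]
        by_cases hr : r = pvIdx |k| c
        · subst hr; tauto
        · tauto
      rw [h1, h2, Finset.sum_insert (Finset.notMem_erase _ _)]
      ring

theorem pv_good_of (myList : List Int) (k c : Int) (hk : k ≠ 0)
    (hmem : c ∈ pvRL myList k) (h0 : c ≠ 0)
    (hh : ¬(PySem.Int.mod k 2 = 0 ∧ c = PySem.Int.floordiv k 2)) : pvGood k c := by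
  simp only [pvRL, List.mem_map] at hmem
  obtain ⟨x, -, hx⟩ := hmem
  have hdm := PySem.Int.floordiv_mul_add_mod k 2
  have h2k : 2 * c = k → PySem.Int.mod k 2 = 0 ∧ c = PySem.Int.floordiv k 2 := by
    intro h2
    have : PySem.Int.mod k 2 = 0 := (PySem.Int.mod_eq_zero_iff_dvd k 2).mpr ⟨c, by omega⟩
    exact ⟨this, by omega⟩
  unfold pvGood
  rcases lt_trichotomy k 0 with hneg | hz | hpos
  · have hb := PySem.Int.mod_neg_bounds x hneg
    rw [hx] at hb
    refine ⟨Or.inr ⟨hneg, hb.1, by omega⟩, fun h2 => hh (h2k h2)⟩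
  · omega
  · have hb1 := PySem.Int.mod_nonneg x hpos
    have hb2 := PySem.Int.mod_lt x hpos
    rw [hx] at hb1 hb2
    exact ⟨Or.inl ⟨hpos, by omega, hb2⟩, fun h2 => hh (h2k h2)⟩

-- evaluation of A's helper on the final dict
theorem pv_A_sum (myList : List Int) (k : Int) (hk : k ≠ 0)
    (d : PySem.Dict Int Int) (K : List Int)
    (hitems : d.items = K.map (fun c => (c, ((pvRL myList k).count c : Int))))
    (hnd : K.Nodup)
    (hmem : ∀ c, c ∈ K ↔ c ∈ pvRL myList k ∧ c ≠ 0 ∧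
        ¬(PySem.Int.mod k 2 = 0 ∧ c = PySem.Int.floordiv k 2)) :
    pvGetSumExceptForValue d k =
      ∑ r ∈ (K.map (pvIdx |k|)).toFinset, pvM (pvRL myList |k|) |k| r := by
  have hGood : ∀ c ∈ K, pvGood k c := by
    intro c hc
    obtain ⟨h1, h2, h3⟩ := (hmem c).mp hc
    exact pv_good_of myList k c hk h1 h2 h3
  have hkeys : d.keys = K := by
    rw [PySem.Dict.keys, hitems, List.map_map]
    have : ((fun (x : Int × Int) => x.1) ∘ fun c : Int => (c, ((pvRL myList k).count c : Int))) = id := rfl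
    rw [this, List.map_id]
  have hknd : d.keys.Nodup := by rw [hkeys]; exact hnd
  have hcongr : ∀ (st : Int × List Int), ∀ c ∈ K,
      (if k - c ≠ c ∧ c ∉ st.2 then
        (st.1 + max (((pvRL myList k).count c : Int))
          (if d.contains (k - c) = true then d.getD (k - c) 0 else 0),
         st.2 ++ [c, k - c])
      else st)
      = if c ∈ st.2 then st
        else (st.1 + pvM (pvRL myList |k|) |k| (pvIdx |k| c), st.2 ++ [c, k - c]) := by
    intro st c hcK
    have hgc := hGood c hcK
    have hgc' := pv_good_partner hgc
    have hne : k - c ≠ c := by unfold pvGood at hgc; omega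
    by_cases hst : c ∈ st.2
    · rw [if_neg (by tauto), if_pos hst]
    · rw [if_pos ⟨hne, hst⟩, if_neg hst]
      have hhalfc' : ¬(PySem.Int.mod k 2 = 0 ∧ k - c = PySem.Int.floordiv k 2) := by
        rintro ⟨hev, heq⟩
        have hdm := PySem.Int.floordiv_mul_add_mod k 2
        unfold pvGood at hgc
        omega
      have hother : (if d.contains (k - c) = true then d.getD (k - c) 0 else 0)
          = ((pvRL myList k).count (k - c) : Int) := by
        by_cases hKc : (k - c) ∈ K
        · rw [if_pos ((PySem.Dict.contains_iff_mem_keys d _).mpr (hkeys ▸ hKc))]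
          exact PySem.Dict.getD_of_mem_items d
            (by rw [hitems]; exact List.mem_map.mpr ⟨k - c, hKc, rfl⟩) hknd 0
        · have hcont : ¬(d.contains (k - c) = true) := by
            intro h
            exact hKc (hkeys ▸ (PySem.Dict.contains_iff_mem_keys d _).mp h)
          rw [if_neg hcont]
          have hnotin : (k - c) ∉ pvRL myList k := by
            intro hin
            exact hKc ((hmem _).mpr ⟨hin, by unfold pvGood at hgc'; omega, hhalfc'⟩)
          rw [List.count_eq_zero.mpr hnotin]
          simp
      rw [hother, pv_count_bridge myList k c hk (pv_good_bounds hgc),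
        pv_count_bridge myList k (k - c) hk (pv_good_bounds hgc'),
        pv_rep_partner hgc, pv_M_idx (pvRL myList |k|) hgc]
  unfold pvGetSumExceptForValue
  rw [hitems, List.foldl_map]
  rw [PySem.List.foldl_congr_mem _ _
    (fun (st : Int × List Int) c =>
      if c ∈ st.2 then st
      else (st.1 + pvM (pvRL myList |k|) |k| (pvIdx |k| c), st.2 ++ [c, k - c])) _
    hcongr]
  rw [pv_loop_sum k (pvRL myList |k|) K [] 0 hnd hGood (by simp) (by simp)]
  simp

-- a pair index inside the range that no surviving key carries has empty buckets
theorem pv_absent (myList : List Int) (k : Int) (hk : k ≠ 0) (K : List Int)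
    (hmem : ∀ c, c ∈ K ↔ c ∈ pvRL myList k ∧ c ≠ 0 ∧
        ¬(PySem.Int.mod k 2 = 0 ∧ c = PySem.Int.floordiv k 2))
    (r : Int) (hrK : r ∉ (K.map (pvIdx |k|)).toFinset)
    (s : Int) (hs1 : 0 < s) (hs2 : s < |k|) (hs3 : 2 * s ≠ |k|)
    (hmin : min s (|k| - s) = r) :
    (pvRL myList |k|).count s = 0 := by
  by_contra hne
  have hsmem : s ∈ pvRL myList |k| := by
    by_contra h
    exact hne (List.count_eq_zero.mpr h)
  obtain ⟨x, hxmem, hxs⟩ := List.mem_map.mp hsmem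
  have hfin : ∀ c : Int, PySem.Int.mod x k = c → c ≠ 0 → 2 * c ≠ k → pvRep |k| c = s → False := by
    intro c hmod hne0 hc2 hrep
    have halfc : ¬(PySem.Int.mod k 2 = 0 ∧ c = PySem.Int.floordiv k 2) := by
      rintro ⟨hev, heq⟩
      have hdm := PySem.Int.floordiv_mul_add_mod k 2
      omega
    have hcK : c ∈ K := (hmem c).mpr
      ⟨List.mem_map.mpr ⟨x, hxmem, hmod⟩, hne0, halfc⟩
    apply hrK
    simp only [List.mem_toFinset, List.mem_map]
    refine ⟨c, hcK, ?_⟩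
    unfold pvIdx
    rw [hrep]
    exact hmin
  rcases abs_cases k with ⟨h1, h2⟩ | ⟨h1, h2⟩
  · -- 0 ≤ k, so k = |k| > 0 and the signed class is s itself
    refine hfin s ?_ (by omega) (by omega) (by unfold pvRep; split_ifs <;> omega)
    exact (pv_mod_point k s hk (by omega) x).mpr (by rw [show pvRep |k| s = s by unfold pvRep; split_ifs <;> omega]; exact hxs)
  · -- k < 0: the signed class is s - |k|
    refine hfin (s - |k|) ?_ (by omega) (by omega) (by unfold pvRep; split_ifs <;> omega)
    exact (pv_mod_point k (s - |k|) hk (by omega) x).mpr (by rw [show pvRep |k| (s - |k|) = s by unfold pvRep; split_ifs <;> omega]; exact hxs)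

-- the set of pair indices of the surviving keys can be widened to the whole range [1, ⌈m/2⌉):
-- missing indices have both buckets empty
theorem pv_sum_ext (myList : List Int) (k : Int) (hk : k ≠ 0) (K : List Int)
    (hmem : ∀ c, c ∈ K ↔ c ∈ pvRL myList k ∧ c ≠ 0 ∧
        ¬(PySem.Int.mod k 2 = 0 ∧ c = PySem.Int.floordiv k 2)) :
    ∑ r ∈ (K.map (pvIdx |k|)).toFinset, pvM (pvRL myList |k|) |k| r =
      ∑ r ∈ (PySem.List.pyRange 1 (PySem.Int.floordiv (|k| + 1) 2) 1).toFinset,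
        pvM (pvRL myList |k|) |k| r := by
  have hm0 : (0:Int) < |k| := abs_pos.mpr hk
  have hfd : PySem.Int.floordiv (|k| + 1) 2 = (|k| + 1) / 2 :=
    PySem.Int.floordiv_eq_ediv_of_pos (by omega)
  have hGood : ∀ c ∈ K, pvGood k c := by
    intro c hc
    obtain ⟨h1, h2, h3⟩ := (hmem c).mp hc
    exact pv_good_of myList k c hk h1 h2 h3
  apply Finset.sum_subset
  · intro r hr
    simp only [List.mem_toFinset, List.mem_map] at hr
    obtain ⟨c, hcK, rfl⟩ := hr
    have hb := pv_rep_bounds (hGood c hcK)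
    simp only [List.mem_toFinset, PySem.List.mem_pyRange_one]
    rw [hfd]
    unfold pvIdx
    rw [min_def]
    split_ifs <;> omega
  · intro r hrT hrK
    simp only [List.mem_toFinset, PySem.List.mem_pyRange_one] at hrT
    rw [hfd] at hrT
    have hr2 : 2 * r ≤ |k| ∧ 2 * r ≠ |k| ∧ 1 ≤ r ∧ r < |k| := by omega
    have h1 : (pvRL myList |k|).count r = 0 :=
      pv_absent myList k hk K hmem r hrK r (by omega) (by omega) (by omega)
        (min_eq_left (by omega))
    have h2 : (pvRL myList |k|).count (|k| - r) = 0 :=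
      pv_absent myList k hk K hmem r hrK (|k| - r) (by omega) (by omega) (by omega)
        (by rw [sub_sub_cancel]; exact min_eq_right (by omega))
    unfold pvM
    rw [h1, h2]
    simp

-- the 0 bucket corresponds under |k|
theorem pv_zero_iff (myList : List Int) (k : Int) (hk : k ≠ 0) :
    (0:Int) ∈ pvRL myList k ↔ (0:Int) ∈ pvRL myList |k| := by
  have hrep : pvRep |k| 0 = 0 := by unfold pvRep; split_ifs <;> omega
  unfold pvRL
  simp only [List.mem_map]
  constructor
  · rintro ⟨x, hx, hm⟩
    exact ⟨x, hx, by rw [← hrep]; exact (pv_mod_point k 0 hk (by constructor <;> omega) x).mp hm⟩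
  · rintro ⟨x, hx, hm⟩
    exact ⟨x, hx, (pv_mod_point k 0 hk (by constructor <;> omega) x).mpr (by rw [hrep]; exact hm)⟩

-- the half bucket (with its evenness guard) corresponds under |k|
theorem pv_half_iff (myList : List Int) (k : Int) (hk : k ≠ 0) :
    (PySem.Int.mod k 2 = 0 ∧ PySem.Int.floordiv k 2 ∈ pvRL myList k) ↔
      (PySem.Int.mod |k| 2 = 0 ∧ PySem.Int.floordiv |k| 2 ∈ pvRL myList |k|) := by
  have hp1 : PySem.Int.mod k 2 = k % 2 := PySem.Int.mod_eq_emod_of_pos (by omega)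
  have hp2 : PySem.Int.mod |k| 2 = |k| % 2 := PySem.Int.mod_eq_emod_of_pos (by omega)
  have habs : |k| = k ∨ |k| = -k := abs_choice k
  have habs0 : (0:Int) ≤ |k| := abs_nonneg k
  have hpar : PySem.Int.mod k 2 = 0 ↔ PySem.Int.mod |k| 2 = 0 := by
    rw [hp1, hp2]; omega
  have hdm1 := PySem.Int.floordiv_mul_add_mod k 2
  have hdm2 := PySem.Int.floordiv_mul_add_mod |k| 2
  constructor
  · rintro ⟨hev, hm⟩
    refine ⟨hpar.mp hev, ?_⟩
    have hev2 := hpar.mp hev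
    have h2f : PySem.Int.floordiv k 2 * 2 = k := by omega
    have h2f2 : PySem.Int.floordiv |k| 2 * 2 = |k| := by omega
    have hrep : pvRep |k| (PySem.Int.floordiv k 2) = PySem.Int.floordiv |k| 2 := by
      unfold pvRep; split_ifs <;> omega
    unfold pvRL at *
    simp only [List.mem_map] at *
    obtain ⟨x, hx, hmx⟩ := hm
    exact ⟨x, hx, by rw [← hrep]; exact (pv_mod_point k _ hk (by constructor <;> intro <;> omega) x).mp hmx⟩
  · rintro ⟨hev2, hm⟩
    refine ⟨hpar.mpr hev2, ?_⟩
    have hev := hpar.mpr hev2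
    have h2f : PySem.Int.floordiv k 2 * 2 = k := by omega
    have h2f2 : PySem.Int.floordiv |k| 2 * 2 = |k| := by omega
    have hrep : pvRep |k| (PySem.Int.floordiv k 2) = PySem.Int.floordiv |k| 2 := by
      unfold pvRep; split_ifs <;> omega
    unfold pvRL at *
    simp only [List.mem_map] at *
    obtain ⟨x, hx, hmx⟩ := hm
    exact ⟨x, hx, (pv_mod_point k _ hk (by constructor <;> intro <;> omega) x).mpr (by rw [hrep]; exact hmx)⟩

-- membership of a key in an erased dict
theorem pv_contains_erase (d : PySem.Dict Int Int) (z y : Int) :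
    (d.erase z).contains y = true ↔ (d.contains y = true ∧ y ≠ z) := by
  unfold PySem.Dict.contains
  show ((d.items.filter (fun p => !(p.1 == z))).any (fun p => p.1 == y)) = true ↔ _
  simp only [List.any_eq_true, List.mem_filter]
  constructor
  · rintro ⟨p, ⟨hp, hpz⟩, hpy⟩
    have h1 : p.1 = y := by simpa using hpy
    have h2 : p.1 ≠ z := by simpa using hpz
    exact ⟨⟨p, hp, hpy⟩, h1 ▸ h2⟩
  · rintro ⟨⟨p, hp, hpy⟩, hyz⟩
    have h1 : p.1 = y := by simpa using hpy
    exact ⟨p, ⟨hp, by simp [h1, hyz]⟩, hpy⟩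

-- ===================== B-side proof machinery =====================

-- keys of a run list
def pvKeys (runs : List (Int × Int)) : List Int := runs.map Prod.fst

-- first-match lookup in a run list, 0 when absent
def pvLk : List (Int × Int) → Int → Int
  | [], _ => 0
  | p :: t, v => if p.1 = v then p.2 else pvLk t v

-- structural restatement of the two-pointer sweep on an explicit run segment
def pvScan : List (Int × Int) → Int → Int
  | [], _ => 0
  | [p], m => if PySem.Int.mod (2 * p.1) m = 0 then 1 else p.2
  | p :: q :: rest, m =>
      let b := (q :: rest).getLast (List.cons_ne_nil q rest)
      if p.1 + b.1 < m then p.2 + pvScan (q :: rest) m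
      else if m < p.1 + b.1 then b.2 + pvScan (p :: (q :: rest).dropLast) m
      else max p.2 b.2 + pvScan ((q :: rest).dropLast) m
termination_by l _ => l.length
decreasing_by all_goals (simp only [List.length_cons, List.length_dropLast]; omega)

-- the window runs[lo..hi]
def pvSeg (runs : List (Int × Int)) (lo hi : Int) : List (Int × Int) :=
  (runs.drop lo.toNat).take (hi + 1 - lo).toNat

-- structural restatement of Source B's run-length encoding
def pvRLE : List Int → List (Int × Int)
  | [] => []
  | v :: t => (v, ((t.takeWhile (· == v)).length : Int) + 1) :: pvRLE (t.dropWhile (· == v))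
termination_by l => l.length
decreasing_by
  simp only [List.length_cons]
  have := List.length_dropWhile_le (· == v) t
  omega

-- the index set of a key list: one canonical index per complementary pair
def pvIdxSet (keys : List Int) (m : Int) : Finset Int :=
  ((keys.filter (fun v => decide (2 * v ≠ m))).map (fun v => min v (m - v))).toFinset

theorem pvLk_not_mem (runs : List (Int × Int)) (v : Int) (h : v ∉ pvKeys runs) :
    pvLk runs v = 0 := by
  induction runs with
  | nil => rfl
  | cons p t ih =>
    simp only [pvKeys, List.map_cons, List.mem_cons, not_or] at h
    simp only [pvLk, if_neg (fun hh : p.1 = v => h.1 hh.symm)]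
    exact ih h.2

theorem pvLk_append_singleton (l : List (Int × Int)) (b : Int × Int) (v : Int) :
    pvLk (l ++ [b]) v = if v ∈ pvKeys l then pvLk l v else (if b.1 = v then b.2 else 0) := by
  induction l with
  | nil => simp [pvLk, pvKeys]
  | cons p t ih =>
    by_cases hp : p.1 = v
    · simp only [List.cons_append, pvLk, if_pos hp, pvKeys, List.map_cons, List.mem_cons,
        if_pos (Or.inl hp.symm)]
    · simp only [List.cons_append, pvLk, if_neg hp, ih, pvKeys, List.map_cons, List.mem_cons]
      by_cases ht : v ∈ List.map Prod.fst t
      · rw [if_pos ht, if_pos (Or.inr ht)]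
      · have hnor : ¬(v = p.1 ∨ v ∈ List.map Prod.fst t) :=
          fun hor => hor.elim (fun h => hp h.symm) ht
        rw [if_neg ht, if_neg hnor]

theorem pvLk_mem_nodup : ∀ (runs : List (Int × Int)), (pvKeys runs).Nodup →
    ∀ p ∈ runs, pvLk runs p.1 = p.2 := by
  intro runs
  induction runs with
  | nil => intro _ p hp; exact absurd hp (List.not_mem_nil)
  | cons x t ih =>
    intro hnd p hp
    rcases List.mem_cons.mp hp with h | h
    · subst h
      simp [pvLk]
    · have hx : x.1 ≠ p.1 := by
        intro hh
        have : p.1 ∈ pvKeys t := List.mem_map.mpr ⟨p, h, rfl⟩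
        have hnd' := hnd
        rw [show pvKeys (x :: t) = x.1 :: pvKeys t from rfl] at hnd'
        exact (List.nodup_cons.mp hnd').1 (hh ▸ this)
      simp only [pvLk, if_neg hx]
      exact ih (by
        have hnd' := hnd
        rw [show pvKeys (x :: t) = x.1 :: pvKeys t from rfl] at hnd'
        exact (List.nodup_cons.mp hnd').2) p h

theorem pvRunEnd_spec (rs : List Int) (v : Int) : ∀ (n : Nat) (j : Int),
    ((rs.length : Int) - j).toNat ≤ n → 0 ≤ j →
    pvRunEnd rs v n j = j + (((rs.drop j.toNat).takeWhile (· == v)).length : Int) := by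
  intro n
  induction n with
  | zero =>
    intro j hn h0
    have hge : rs.length ≤ j.toNat := by omega
    rw [List.drop_eq_nil_of_le hge]
    simp [pvRunEnd]
  | succ n ih =>
    intro j hn h0
    rw [pvRunEnd]
    split
    · rename_i h
      have hjlt : j.toNat < rs.length := by omega
      have hv : rs[j.toNat] = v := by
        have hg := PySem.List.pyGetD_eq_getElem (xs := rs) (i := j) (d := 0) h0 h.1
        rw [hg] at h
        exact h.2
      rw [ih (j + 1) (by omega) (by omega)]
      rw [List.drop_eq_getElem_cons hjlt, List.takeWhile_cons, if_pos (by simp [hv])]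
      have hsucc : (j + 1).toNat = j.toNat + 1 := by omega
      rw [hsucc]
      simp only [List.length_cons]
      push_cast
      ring
    · rename_i h
      by_cases hj : j < (rs.length : Int)
      · have hjlt : j.toNat < rs.length := by omega
        have hv : ¬(rs[j.toNat] = v) := by
          intro hh
          exact h ⟨hj, by rw [PySem.List.pyGetD_eq_getElem (xs := rs) (i := j) (d := 0) h0 hj]; exact hh⟩
        rw [List.drop_eq_getElem_cons hjlt, List.takeWhile_cons, if_neg (by simp [hv])]
        simp
      · have hge : rs.length ≤ j.toNat := by omega
        rw [List.drop_eq_nil_of_le hge]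
        simp

theorem pvRleLoop_spec (rs : List Int) : ∀ (n : Nat) (i : Int) (acc : List (Int × Int)),
    ((rs.length : Int) - i).toNat ≤ n → 0 ≤ i →
    pvRleLoop rs n i acc = acc ++ pvRLE (rs.drop i.toNat) := by
  intro n
  induction n with
  | zero =>
    intro i acc hn h0
    rw [List.drop_eq_nil_of_le (by omega)]
    simp [pvRleLoop, pvRLE]
  | succ n ih =>
    intro i acc hn h0
    rw [pvRleLoop]
    split
    · rename_i h
      have hilt : i.toNat < rs.length := by omega
      have hget : PySem.List.pyGetD rs i 0 = rs[i.toNat] :=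
        PySem.List.pyGetD_eq_getElem (xs := rs) (i := i) (d := 0) h0 h
      have hje := pvRunEnd_spec rs (PySem.List.pyGetD rs i 0) (rs.length + 1)
        (i + 1) (by omega) (by omega)
      set t := rs.drop (i.toNat + 1) with ht
      have hsucc : (i + 1).toNat = i.toNat + 1 := by omega
      rw [hsucc] at hje
      set L : Nat := (List.takeWhile (· == rs[i.toNat]) t).length with hL
      rw [hget] at hje
      have hjv : pvRunEnd rs rs[i.toNat] (rs.length + 1) (i + 1) = i + 1 + (L : Int) := by
        rw [hje]
      have hLle : L ≤ t.length := by
        have := (List.takeWhile_sublist (p := (· == rs[i.toNat])) (l := t)).length_le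
        omega
      rw [hget, hjv, ih (i + 1 + (L : Int)) _ (by
          have h2 : t.length = rs.length - (i.toNat + 1) := by rw [ht, List.length_drop]
          omega)
        (by omega)]
      have hdropj : rs.drop (i + 1 + (L : Int)).toNat = t.drop L := by
        have h1 : (i + 1 + (L : Int)).toNat = L + (i.toNat + 1) := by omega
        rw [h1, ht, List.drop_drop]
        congr 1
        omega
      rw [hdropj]
      have htd : t.drop L = t.dropWhile (· == rs[i.toNat]) := by
        conv_lhs => rw [← List.takeWhile_append_dropWhile (p := (· == rs[i.toNat])) (l := t), hL]
        exact List.drop_left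
      rw [htd]
      have hdi : rs.drop i.toNat = rs[i.toNat] :: t := by
        rw [ht, List.drop_eq_getElem_cons hilt]
      rw [hdi]
      show acc ++ [(rs[i.toNat], i + 1 + (L : Int) - i)] ++ _ = _
      have hrun : i + 1 + (L : Int) - i = (L : Int) + 1 := by omega
      rw [hrun]
      simp [pvRLE, List.append_assoc, hL]
    · rw [List.drop_eq_nil_of_le (by omega)]
      simp [pvRLE]

-- on a sorted tail t with v below it: the v-run is an initial segment, the rest is strictly above v
theorem pv_sorted_run (v : Int) : ∀ (t : List Int), (∀ y ∈ t, v ≤ y) → t.Pairwise (· ≤ ·) →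
    (∀ y ∈ t.dropWhile (· == v), v < y) ∧
    (t.count v = (t.takeWhile (· == v)).length) ∧
    (∀ w, w ≠ v → t.count w = (t.dropWhile (· == v)).count w) := by
  intro t
  induction t with
  | nil => intro _ _; refine ⟨by simp, by simp, by simp⟩
  | cons x t' ih =>
    intro hv hpw
    rcases List.pairwise_cons.mp hpw with ⟨hx, ht'⟩
    by_cases hxv : x = v
    · have hv' : ∀ y ∈ t', v ≤ y := fun y hy => hv y (List.mem_cons_of_mem _ hy)
      obtain ⟨ih1, ih2, ih3⟩ := ih hv' ht'
      subst hxv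
      refine ⟨?_, ?_, ?_⟩
      · intro y hy
        rw [List.dropWhile_cons, if_pos (by simp)] at hy
        exact ih1 y hy
      · rw [List.takeWhile_cons, if_pos (by simp), List.count_cons]
        simp [ih2]
      · intro w hw
        rw [List.dropWhile_cons, if_pos (by simp), List.count_cons]
        rw [ih3 w hw]
        simp [Ne.symm hw]
    · have hvx : v < x := lt_of_le_of_ne (hv x (List.mem_cons_self)) (fun h => hxv h.symm)
      refine ⟨?_, ?_, ?_⟩
      · intro y hy
        rw [List.dropWhile_cons, if_neg (by simp [hxv])] at hy
        rcases List.mem_cons.mp hy with h | h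
        · omega
        · have := hx y h
          omega
      · rw [List.takeWhile_cons, if_neg (by simp [hxv])]
        simp only [List.length_nil]
        rw [List.count_eq_zero]
        intro hmem
        rcases List.mem_cons.mp hmem with h | h
        · exact hxv h.symm
        · have := hx v h
          omega
      · intro w hw
        rw [List.dropWhile_cons, if_neg (by simp [hxv])]

theorem pvRLE_props : ∀ (n : Nat) (s : List Int), s.length ≤ n → s.Pairwise (· ≤ ·) →
    (pvKeys (pvRLE s)).Pairwise (· < ·) ∧
    (∀ v, v ∈ pvKeys (pvRLE s) ↔ v ∈ s) ∧
    (∀ v, pvLk (pvRLE s) v = (s.count v : Int)) := by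
  intro n
  induction n with
  | zero =>
    intro s hn _
    have : s = [] := List.length_eq_zero_iff.mp (by omega)
    subst this
    refine ⟨by simp [pvRLE, pvKeys], by simp [pvRLE, pvKeys], by simp [pvRLE, pvLk]⟩
  | succ n ih =>
    intro s hn hsort
    cases s with
    | nil => refine ⟨by simp [pvRLE, pvKeys], by simp [pvRLE, pvKeys], by simp [pvRLE, pvLk]⟩
    | cons v t =>
      rcases List.pairwise_cons.mp hsort with ⟨hv, ht⟩
      obtain ⟨hrun1, hrun2, hrun3⟩ := pv_sorted_run v t hv ht
      set dw := t.dropWhile (· == v) with hdw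
      have hdwsub : dw.Sublist t := List.dropWhile_sublist _
      have hdwlen : dw.length ≤ n := by
        have := hdwsub.length_le
        simp only [List.length_cons] at hn
        omega
      obtain ⟨ih1, ih2, ih3⟩ := ih dw hdwlen (ht.sublist hdwsub)
      have hrle : pvRLE (v :: t)
          = (v, ((t.takeWhile (· == v)).length : Int) + 1) :: pvRLE dw := by
        rw [pvRLE]
      refine ⟨?_, ?_, ?_⟩
      · rw [hrle]
        simp only [pvKeys, List.map_cons]
        rw [List.pairwise_cons]
        refine ⟨?_, ih1⟩
        intro y hy
        exact hrun1 y ((ih2 y).mp hy)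
      · intro w
        rw [hrle]
        simp only [pvKeys, List.map_cons, List.mem_cons]
        rw [show ((w = v ∨ w ∈ List.map Prod.fst (pvRLE dw)) ↔ (w = v ∨ w ∈ dw)) from
          or_congr Iff.rfl (ih2 w)]
        constructor
        · rintro (h | h)
          · exact Or.inl h
          · exact Or.inr (hdwsub.mem h)
        · rintro (h | h)
          · exact Or.inl h
          · by_cases hwv : w = v
            · exact Or.inl hwv
            · right
              have hcnt : t.count w = dw.count w := hrun3 w hwv
              have : 0 < t.count w := List.count_pos_iff.mpr h
              exact List.count_pos_iff.mp (by omega)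
      · intro w
        rw [hrle]
        by_cases hwv : w = v
        · subst hwv
          simp only [pvLk, if_true, List.count_cons_self]
          rw [hrun2]
          push_cast
          ring
        · simp only [pvLk, if_neg (fun h : v = w => hwv h.symm)]
          rw [ih3 w, List.count_cons_of_ne (Ne.symm hwv), hrun3 w hwv]

-- the code after Source B's while loop, applied to its final (total, lo, hi) state
def pvPost (runs : List (Int × Int)) (m : Int) (st : Int × Int × Int) : Int :=
  if st.2.1 = st.2.2 then
    st.1 + (if PySem.Int.mod (2 * (PySem.List.pyGetD runs st.2.1 (0, 0)).1) m = 0 then 1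
            else (PySem.List.pyGetD runs st.2.1 (0, 0)).2)
  else st.1

theorem pvSeg_cons (runs : List (Int × Int)) (lo hi : Int) (h0 : 0 ≤ lo) (hlh : lo ≤ hi)
    (hlen : lo < (runs.length : Int)) :
    pvSeg runs lo hi = runs.getD lo.toNat (0, 0) :: pvSeg runs (lo + 1) hi := by
  unfold pvSeg
  have hlt : lo.toNat < runs.length := by omega
  have h1 : runs.drop lo.toNat = runs[lo.toNat] :: runs.drop (lo.toNat + 1) :=
    List.drop_eq_getElem_cons hlt
  have h2 : (hi + 1 - lo).toNat = (hi - lo).toNat + 1 := by omega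
  rw [h1, h2, List.take_succ_cons]
  congr 1
  · exact (List.getD_eq_getElem runs (0, 0) hlt).symm
  · have h3 : (lo + 1).toNat = lo.toNat + 1 := by omega
    have h4 : (hi + 1 - (lo + 1)).toNat = (hi - lo).toNat := by omega
    rw [h3, h4]

theorem pvSeg_snoc (runs : List (Int × Int)) (lo hi : Int) (h0 : 0 ≤ lo) (hlh : lo ≤ hi)
    (hlen : hi < (runs.length : Int)) :
    pvSeg runs lo hi = pvSeg runs lo (hi - 1) ++ [runs.getD hi.toNat (0, 0)] := by
  unfold pvSeg
  have hlt : (hi - lo).toNat < (runs.drop lo.toNat).length := by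
    rw [List.length_drop]
    omega
  have h2 : (hi + 1 - lo).toNat = (hi - lo).toNat + 1 := by omega
  rw [h2, List.take_succ]
  congr 1
  · congr 1
    omega
  · rw [List.getElem?_eq_getElem hlt]
    simp only [Option.toList_some, List.getElem_drop]
    congr 1
    rw [List.getD_eq_getElem runs (0, 0) (by omega)]
    congr 1
    omega

theorem pv_post_stop (runs : List (Int × Int)) (m : Int) (lo hi total : Int)
    (hle : hi ≤ lo) (h0 : 0 ≤ lo) (hlen : hi < (runs.length : Int)) :
    pvPost runs m (total, lo, hi) = total + pvScan (pvSeg runs lo hi) m := by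
  unfold pvPost
  by_cases he : lo = hi
  · simp only [if_pos he]
    have hseg : pvSeg runs lo hi = [runs.getD lo.toNat (0, 0)] := by
      rw [pvSeg_cons runs lo hi h0 (by omega) (by omega)]
      have : pvSeg runs (lo + 1) hi = [] := by
        unfold pvSeg
        have : (hi + 1 - (lo + 1)).toNat = 0 := by omega
        rw [this, List.take_zero]
      rw [this]
    rw [hseg]
    have hget : PySem.List.pyGetD runs lo (0, 0) = runs.getD lo.toNat (0, 0) := by
      rw [PySem.List.pyGetD_eq_getElem (xs := runs) (i := lo) (d := (0,0)) h0 (by omega),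
        List.getD_eq_getElem runs (0, 0) (by omega)]
    simp only [pvScan, hget]
  · simp only [if_neg he]
    have hseg : pvSeg runs lo hi = [] := by
      unfold pvSeg
      have : (hi + 1 - lo).toNat = 0 := by omega
      rw [this, List.take_zero]
    rw [hseg]
    simp [pvScan]

-- two-pointer sweep (plus the final lo == hi check) = structural scan of the window
theorem pv_twoPtr_scan (runs : List (Int × Int)) (m : Int) : ∀ (n : Nat) (lo hi total : Int),
    (hi - lo).toNat ≤ n → 0 ≤ lo → hi < (runs.length : Int) →
    pvPost runs m (pvTwoPtr runs m n lo hi total) = total + pvScan (pvSeg runs lo hi) m := by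
  intro n
  induction n with
  | zero =>
    intro lo hi total hn h0 hlen
    exact pv_post_stop runs m lo hi total (by omega) h0 hlen
  | succ n ih =>
    intro lo hi total hn h0 hlen
    by_cases hlh : lo < hi
    · have hgetlo : PySem.List.pyGetD runs lo (0, 0) = runs.getD lo.toNat (0, 0) := by
        rw [PySem.List.pyGetD_eq_getElem (xs := runs) (i := lo) (d := (0,0)) h0 (by omega),
          List.getD_eq_getElem runs (0, 0) (by omega)]
      have hgethi : PySem.List.pyGetD runs hi (0, 0) = runs.getD hi.toNat (0, 0) := by
        rw [PySem.List.pyGetD_eq_getElem (xs := runs) (i := hi) (d := (0,0)) (by omega) hlen,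
          List.getD_eq_getElem runs (0, 0) (by omega)]
      set a := runs.getD lo.toNat (0, 0) with ha
      set b := runs.getD hi.toNat (0, 0) with hb
      -- the window as an explicit p :: q :: rest with head a and last b
      have hseg1 : pvSeg runs lo hi = a :: pvSeg runs (lo + 1) hi :=
        pvSeg_cons runs lo hi h0 (by omega) (by omega)
      have hseg2 : pvSeg runs (lo + 1) hi = pvSeg runs (lo + 1) (hi - 1) ++ [b] :=
        pvSeg_snoc runs (lo + 1) hi (by omega) (by omega) hlen
      have hseg3 : pvSeg runs lo (hi - 1) = a :: pvSeg runs (lo + 1) (hi - 1) :=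
        pvSeg_cons runs lo (hi - 1) h0 (by omega) (by omega)
      cases htl : pvSeg runs (lo + 1) hi with
      | nil => exact absurd (htl ▸ hseg2) (by simp)
      | cons qq rest =>
        rw [htl] at hseg2
        have hlastq : (qq :: rest).getLast? = some b := by
          rw [hseg2]
          exact List.getLast?_concat
        have hlast : (qq :: rest).getLast (List.cons_ne_nil qq rest) = b := by
          have h2 := List.getLast?_eq_getLast (l := qq :: rest) (List.cons_ne_nil qq rest)
          rw [h2] at hlastq
          exact Option.some.inj hlastq
        have hdl : (qq :: rest).dropLast = pvSeg runs (lo + 1) (hi - 1) := by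
          rw [hseg2, List.dropLast_concat]
        rw [pvTwoPtr, if_pos hlh]
        simp only [hgetlo, hgethi]
        rw [hseg1, htl]
        by_cases hc1 : a.1 + b.1 < m
        · rw [if_pos hc1, ih (lo + 1) hi (total + a.2) (by omega) (by omega) hlen, htl]
          have : pvScan (a :: qq :: rest) m = a.2 + pvScan (qq :: rest) m := by
            simp only [pvScan, hlast]
            rw [if_pos hc1]
          rw [this]
          ring
        · rw [if_neg hc1]
          by_cases hc2 : m < a.1 + b.1
          · rw [if_pos hc2, ih lo (hi - 1) (total + b.2) (by omega) h0 (by omega)]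
            have : pvScan (a :: qq :: rest) m = b.2 + pvScan (a :: (qq :: rest).dropLast) m := by
              simp only [pvScan, hlast]
              rw [if_neg (by omega), if_pos hc2]
            rw [this, hdl, ← hseg3]
            ring
          · rw [if_neg hc2, ih (lo + 1) (hi - 1) (total + max a.2 b.2) (by omega) (by omega)
              (by omega)]
            have : pvScan (a :: qq :: rest) m = max a.2 b.2 + pvScan ((qq :: rest).dropLast) m := by
              simp only [pvScan, hlast]
              rw [if_neg (by omega), if_neg (by omega)]
            rw [this, hdl]
            ring
    · rw [pvTwoPtr, if_neg hlh]
      exact pv_post_stop runs m lo hi total (by omega) h0 hlen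

theorem pv_two_eq_m (m v : Int) (hm : 0 < m) (h1 : 0 < v) (h2 : v < m) :
    PySem.Int.mod (2 * v) m = 0 ↔ 2 * v = m := by
  rw [PySem.Int.mod_eq_emod_of_pos hm]
  rcases lt_trichotomy (2 * v) m with h | h | h
  · rw [Int.emod_eq_of_lt (by omega) (by omega)]
    omega
  · rw [h, Int.emod_self]
    omega
  · have h3 : (2 * v) % m = (2 * v - m) % m := by
      calc (2 * v) % m = (2 * v - m + m * 1) % m := by ring_nf
        _ = (2 * v - m) % m := Int.add_mul_emod_self_left _ _ _
    rw [h3, Int.emod_eq_of_lt (by omega) (by omega)]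
    omega

theorem mem_pvIdxSet {keys : List Int} {m r : Int} :
    r ∈ pvIdxSet keys m ↔ ∃ v, v ∈ keys ∧ 2 * v ≠ m ∧ min v (m - v) = r := by
  unfold pvIdxSet
  simp only [List.mem_toFinset, List.mem_map, List.mem_filter, decide_eq_true_eq]
  constructor
  · rintro ⟨v, ⟨h1, h2⟩, h3⟩
    exact ⟨v, h1, h2, h3⟩
  · rintro ⟨v, h1, h2, h3⟩
    exact ⟨v, ⟨h1, h2⟩, h3⟩

theorem pvIdxSet_cons (x : Int) (keys : List Int) (m : Int) (h : 2 * x ≠ m) :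
    pvIdxSet (x :: keys) m = insert (min x (m - x)) (pvIdxSet keys m) := by
  unfold pvIdxSet
  rw [List.filter_cons, if_pos (by simpa using h), List.map_cons, List.toFinset_cons]

theorem pvIdxSet_snoc (keys : List Int) (x : Int) (m : Int) (h : 2 * x ≠ m) :
    pvIdxSet (keys ++ [x]) m = insert (min x (m - x)) (pvIdxSet keys m) := by
  unfold pvIdxSet
  rw [List.filter_append, List.map_append, List.toFinset_append,
    List.filter_cons, if_pos (by simpa using h)]
  apply Finset.ext
  intro r
  simp only [Finset.mem_union, List.mem_toFinset, List.map_cons, List.filter_nil, List.map_nil,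
    List.mem_cons, List.not_mem_nil, or_false, Finset.mem_insert]
  tauto

theorem pv_pairwise_le_getLast : ∀ (l : List Int), l.Pairwise (· < ·) → ∀ (h : l ≠ []),
    ∀ e ∈ l, e ≤ l.getLast h := by
  intro l
  induction l with
  | nil => intro _ h; exact absurd rfl h
  | cons x t iht =>
    intro hpw h e he
    rcases List.pairwise_cons.mp hpw with ⟨hx, ht⟩
    cases t with
    | nil =>
      have : e = x := by simpa using he
      simp [this]
    | cons y t' =>
      rw [List.getLast_cons (List.cons_ne_nil y t')]
      rcases List.mem_cons.mp he with h1 | h1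
      · have := hx _ (List.getLast_mem (List.cons_ne_nil y t'))
        omega
      · exact iht ht (List.cons_ne_nil y t') e h1

-- the scan of a strictly-increasing positive run list sums each pair's max once,
-- the self-complementary key contributing 1
theorem pvScan_sum (m : Int) (hm : 0 < m) : ∀ (n : Nat) (seg : List (Int × Int)),
    seg.length ≤ n → (pvKeys seg).Pairwise (· < ·) →
    (∀ p ∈ seg, 0 < p.1 ∧ p.1 < m ∧ 0 < p.2) →
    pvScan seg m =
      (if PySem.Int.mod m 2 = 0 ∧ PySem.Int.floordiv m 2 ∈ pvKeys seg then 1 else 0)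
      + ∑ r ∈ pvIdxSet (pvKeys seg) m, max (pvLk seg r) (pvLk seg (m - r)) := by
  have hmod2 : PySem.Int.mod m 2 = m % 2 := PySem.Int.mod_eq_emod_of_pos (by omega)
  have hfd2 : PySem.Int.floordiv m 2 = m / 2 := PySem.Int.floordiv_eq_ediv_of_pos (by omega)
  intro n
  induction n with
  | zero =>
    intro seg hn _ _
    have : seg = [] := List.length_eq_zero_iff.mp (by omega)
    subst this
    simp [pvScan, pvKeys, pvIdxSet]
  | succ n ih =>
    intro seg hn hpw hbnd
    cases seg with
    | nil => simp [pvScan, pvKeys, pvIdxSet]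
    | cons p T =>
      cases T with
      | nil =>
        obtain ⟨hp1, hp2, hp3⟩ := hbnd p List.mem_cons_self
        have hkeys : pvKeys [p] = [p.1] := rfl
        have hmodiff : PySem.Int.mod (2 * p.1) m = 0 ↔ 2 * p.1 = m := pv_two_eq_m m p.1 hm hp1 hp2
        have hscan : pvScan [p] m = if PySem.Int.mod (2 * p.1) m = 0 then 1 else p.2 := by simp [pvScan]
        by_cases h2 : 2 * p.1 = m
        · rw [hscan, if_pos (hmodiff.mpr h2)]
          have hsp : (PySem.Int.mod m 2 = 0 ∧ PySem.Int.floordiv m 2 ∈ pvKeys [p]) := by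
            rw [hmod2, hfd2, hkeys]
            refine ⟨by omega, ?_⟩
            simp only [List.mem_cons, List.not_mem_nil, or_false]
            omega
          rw [if_pos hsp]
          have hempty : pvIdxSet (pvKeys [p]) m = ∅ := by
            rw [hkeys]
            unfold pvIdxSet
            rw [List.filter_cons, if_neg (by simpa using h2)]
            simp
          rw [hempty]
          simp
        · rw [hscan, if_neg (fun hh => h2 (hmodiff.mp hh))]
          have hsp : ¬(PySem.Int.mod m 2 = 0 ∧ PySem.Int.floordiv m 2 ∈ pvKeys [p]) := by
            rw [hmod2, hfd2, hkeys]
            rintro ⟨he, hmem⟩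
            simp only [List.mem_cons, List.not_mem_nil, or_false] at hmem
            omega
          rw [if_neg hsp]
          have hset : pvIdxSet (pvKeys [p]) m = {min p.1 (m - p.1)} := by
            rw [hkeys]
            unfold pvIdxSet
            rw [List.filter_cons, if_pos (by simpa using h2)]
            simp
          rw [hset, Finset.sum_singleton]
          have hLkp : pvLk [p] p.1 = p.2 := by simp [pvLk]
          have hLkc : pvLk [p] (m - p.1) = 0 :=
            pvLk_not_mem [p] (m - p.1) (by
              rw [hkeys]
              simp only [List.mem_cons, List.not_mem_nil, or_false]
              omega)
          rcases Ne.lt_or_gt h2 with hlt | hgt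
          · rw [min_eq_left (by omega), hLkp, hLkc]
            omega
          · rw [min_eq_right (by omega), show m - (m - p.1) = p.1 by ring, hLkp, hLkc]
            omega
      | cons q rest =>
        set T := q :: rest with hT
        have hTne : T ≠ [] := by simp [hT]
        set b := T.getLast hTne with hbdef
        set I := T.dropLast with hIdef
        have hsplit : I ++ [b] = T := List.dropLast_append_getLast hTne
        obtain ⟨hp1, hp2, hp3⟩ := hbnd p List.mem_cons_self
        have hbT : b ∈ T := List.getLast_mem hTne
        obtain ⟨hb1, hb2, hb3⟩ := hbnd b (List.mem_cons_of_mem _ hbT)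
        -- key structure
        have hkseg : pvKeys (p :: T) = p.1 :: (pvKeys I ++ [b.1]) := by
          unfold pvKeys
          rw [← hsplit]
          simp
        have hkT : pvKeys T = pvKeys I ++ [b.1] := by
          unfold pvKeys
          rw [← hsplit]
          simp
        have hpwT : (pvKeys T).Pairwise (· < ·) := by
          have := hpw
          rw [show pvKeys (p :: T) = p.1 :: pvKeys T from rfl] at this
          exact (List.pairwise_cons.mp this).2
        have hpk : ∀ e ∈ pvKeys T, p.1 < e := by
          have := hpw
          rw [show pvKeys (p :: T) = p.1 :: pvKeys T from rfl] at this
          exact (List.pairwise_cons.mp this).1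
        have hkTne : pvKeys T ≠ [] := by
          rw [hkT]
          simp
        have hkb : ∀ e ∈ pvKeys T, e ≤ b.1 := by
          intro e he
          have hgl? : (pvKeys T).getLast? = some b.1 := by
            rw [hkT]
            exact List.getLast?_concat
          have h2 := List.getLast?_eq_getLast (l := pvKeys T) hkTne
          rw [h2] at hgl?
          have hgl := Option.some.inj hgl?
          have := pv_pairwise_le_getLast (pvKeys T) hpwT hkTne e he
          omega
        have hkIb : ∀ e ∈ pvKeys I, e < b.1 := by
          intro e he
          rcases List.pairwise_append.mp (hkT ▸ hpwT) with ⟨_, _, hcross⟩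
          exact hcross e he b.1 (List.mem_cons_self)
        have hpb : p.1 < b.1 := hpk b.1 (by rw [hkT]; exact List.mem_append_right _ List.mem_cons_self)
        have hksegle : ∀ e ∈ pvKeys (p :: T), e ≤ b.1 := by
          intro e he
          rcases List.mem_cons.mp he with h | h
          · omega
          · exact hkb e h
        have hksegge : ∀ e ∈ pvKeys (p :: T), p.1 ≤ e := by
          intro e he
          rcases List.mem_cons.mp he with h | h
          · omega
          · have := hpk e h
            omega
        have hscan : pvScan (p :: q :: rest) m =
            if p.1 + b.1 < m then p.2 + pvScan (q :: rest) m
            else if m < p.1 + b.1 then b.2 + pvScan (p :: (q :: rest).dropLast) m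
            else max p.2 b.2 + pvScan ((q :: rest).dropLast) m := by
          simp only [pvScan]
          rfl
        by_cases hc1 : p.1 + b.1 < m
        · -- complement of p.1 is above every key
          have h2p : 2 * p.1 ≠ m := by omega
          have ihT := ih T (by simpa using Nat.le_of_succ_le_succ hn) hpwT
            (fun pp hpp => hbnd pp (List.mem_cons_of_mem _ hpp))
          rw [hscan, if_pos hc1, ← hT, ihT]
          have hsp : (PySem.Int.mod m 2 = 0 ∧ PySem.Int.floordiv m 2 ∈ pvKeys (p :: T)) ↔
              (PySem.Int.mod m 2 = 0 ∧ PySem.Int.floordiv m 2 ∈ pvKeys T) := by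
            rw [hmod2, hfd2, show pvKeys (p :: T) = p.1 :: pvKeys T from rfl]
            constructor
            · rintro ⟨he, hmem⟩
              rcases List.mem_cons.mp hmem with h | h
              · omega
              · exact ⟨he, h⟩
            · rintro ⟨he, hmem⟩
              exact ⟨he, List.mem_cons_of_mem _ hmem⟩
          rw [if_congr hsp rfl rfl]
          have hins : pvIdxSet (pvKeys (p :: T)) m = insert p.1 (pvIdxSet (pvKeys T) m) := by
            rw [show pvKeys (p :: T) = p.1 :: pvKeys T from rfl, pvIdxSet_cons _ _ _ h2p,
              min_eq_left (by omega)]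
          have hnotin : p.1 ∉ pvIdxSet (pvKeys T) m := by
            intro hmem
            obtain ⟨v, hv, h2v, hminv⟩ := mem_pvIdxSet.mp hmem
            have hv1 := hpk v hv
            have hv2 := hkb v hv
            rcases min_cases v (m - v) with ⟨he, _⟩ | ⟨he, _⟩ <;> omega
          rw [hins, Finset.sum_insert hnotin]
          have hterm : max (pvLk (p :: T) p.1) (pvLk (p :: T) (m - p.1)) = p.2 := by
            rw [show pvLk (p :: T) p.1 = p.2 from by simp [pvLk],
              pvLk_not_mem (p :: T) (m - p.1) (fun hmem => by
                have := hksegle _ hmem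
                omega)]
            omega
          rw [hterm]
          have hcongr : ∀ r ∈ pvIdxSet (pvKeys T) m,
              max (pvLk (p :: T) r) (pvLk (p :: T) (m - r)) = max (pvLk T r) (pvLk T (m - r)) := by
            intro r hmem
            obtain ⟨v, hv, h2v, hminv⟩ := mem_pvIdxSet.mp hmem
            have hrv : r ≤ v := by
              rcases min_cases v (m - v) with ⟨he, _⟩ | ⟨he, _⟩ <;> omega
            have hrb : r ≤ b.1 := le_trans hrv (hkb v hv)
            have hr_ne : p.1 ≠ r := fun he => hnotin (he ▸ hmem)
            have hmr_ne : p.1 ≠ m - r := by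
              intro he
              omega
            rw [show pvLk (p :: T) r = pvLk T r from by simp [pvLk, if_neg hr_ne],
              show pvLk (p :: T) (m - r) = pvLk T (m - r) from by simp [pvLk, if_neg hmr_ne]]
          rw [Finset.sum_congr rfl hcongr]
          ring
        · by_cases hc2 : m < p.1 + b.1
          · -- complement of b.1 is below every key
            have h2b : 2 * b.1 ≠ m := by omega
            have hsegsplit : p :: T = (p :: I) ++ [b] := by
              rw [← hsplit]
              rfl
            have hsubl : (p :: I).Sublist (p :: T) := by
              rw [hsegsplit]
              exact List.sublist_append_left _ _
            have hpwI : (pvKeys (p :: I)).Pairwise (· < ·) :=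
              hpw.sublist (hsubl.map Prod.fst)
            have hlenI : (p :: I).length ≤ n := by
              have h1 : I.length + 1 = T.length := by
                rw [← hsplit]
                simp
              have h2 : (p :: T).length = T.length + 1 := by simp
              simp only [List.length_cons]
              omega
            have ihI := ih (p :: I) hlenI hpwI (fun pp hpp => hbnd pp (hsubl.mem hpp))
            rw [hscan, if_neg hc1, if_pos hc2, ← hT,
              show (q :: rest).dropLast = I from rfl, ihI]
            have hkI_lt : ∀ e ∈ pvKeys (p :: I), e < b.1 := by
              intro e he
              rcases List.mem_cons.mp he with h | h
              · omega
              · exact hkIb e h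
            have hkI_ge : ∀ e ∈ pvKeys (p :: I), p.1 ≤ e := by
              intro e he
              have : e ∈ pvKeys (p :: T) := (hsubl.map Prod.fst).mem he
              exact hksegge e this
            have hsp : (PySem.Int.mod m 2 = 0 ∧ PySem.Int.floordiv m 2 ∈ pvKeys (p :: T)) ↔
                (PySem.Int.mod m 2 = 0 ∧ PySem.Int.floordiv m 2 ∈ pvKeys (p :: I)) := by
              rw [hmod2, hfd2, hsegsplit]
              unfold pvKeys
              rw [List.map_append]
              constructor
              · rintro ⟨he, hmem⟩
                rcases List.mem_append.mp hmem with h | h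
                · exact ⟨he, h⟩
                · simp only [List.map_cons, List.map_nil, List.mem_cons, List.not_mem_nil,
                    or_false] at h
                  omega
              · rintro ⟨he, hmem⟩
                exact ⟨he, List.mem_append_left _ hmem⟩
            rw [if_congr hsp rfl rfl]
            have hkeyssnoc : pvKeys (p :: T) = pvKeys (p :: I) ++ [b.1] := by
              rw [hsegsplit]
              unfold pvKeys
              simp
            have hins : pvIdxSet (pvKeys (p :: T)) m
                = insert (m - b.1) (pvIdxSet (pvKeys (p :: I)) m) := by
              rw [hkeyssnoc, pvIdxSet_snoc _ _ _ h2b, min_eq_right (by omega)]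
            have hnotin : (m - b.1) ∉ pvIdxSet (pvKeys (p :: I)) m := by
              intro hmem
              obtain ⟨v, hv, h2v, hminv⟩ := mem_pvIdxSet.mp hmem
              have hv1 := hkI_ge v hv
              have hv2 := hkI_lt v hv
              rcases min_cases v (m - v) with ⟨he, _⟩ | ⟨he, _⟩ <;> omega
            rw [hins, Finset.sum_insert hnotin]
            have hlkb : pvLk (p :: T) b.1 = b.2 := by
              rw [hsegsplit, pvLk_append_singleton,
                if_neg (fun hmem => by have := hkI_lt _ hmem; omega), if_pos rfl]
            have hterm : max (pvLk (p :: T) (m - b.1)) (pvLk (p :: T) (m - (m - b.1))) = b.2 := by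
              rw [show m - (m - b.1) = b.1 by ring, hlkb,
                pvLk_not_mem (p :: T) (m - b.1) (fun hmem => by
                  have := hksegge _ hmem
                  omega)]
              omega
            rw [hterm]
            have hcongr : ∀ r ∈ pvIdxSet (pvKeys (p :: I)) m,
                max (pvLk (p :: T) r) (pvLk (p :: T) (m - r))
                  = max (pvLk (p :: I) r) (pvLk (p :: I) (m - r)) := by
              intro r hmem
              obtain ⟨v, hv, h2v, hminv⟩ := mem_pvIdxSet.mp hmem
              have hrv : r ≤ v := by
                rcases min_cases v (m - v) with ⟨he, _⟩ | ⟨he, _⟩ <;> omega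
              have hrb : r < b.1 := lt_of_le_of_lt hrv (hkI_lt v hv)
              have hmr_ne : b.1 ≠ m - r := by
                intro he
                exact hnotin (by rw [show m - b.1 = r by omega]; exact hmem)
              have e1 : pvLk (p :: T) r = pvLk (p :: I) r := by
                rw [hsegsplit, pvLk_append_singleton]
                by_cases hmm : r ∈ pvKeys (p :: I)
                · rw [if_pos hmm]
                · rw [if_neg hmm, if_neg (by omega), pvLk_not_mem _ _ hmm]
              have e2 : pvLk (p :: T) (m - r) = pvLk (p :: I) (m - r) := by
                rw [hsegsplit, pvLk_append_singleton]
                by_cases hmm : (m - r) ∈ pvKeys (p :: I)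
                · rw [if_pos hmm]
                · rw [if_neg hmm, if_neg hmr_ne, pvLk_not_mem _ _ hmm]
              rw [e1, e2]
            rw [Finset.sum_congr rfl hcongr]
            ring
          · -- p.1 + b.1 = m : p and b are complementary extremes
            have heqm : p.1 + b.1 = m := by omega
            have h2p : 2 * p.1 ≠ m := by omega
            have h2b : 2 * b.1 ≠ m := by omega
            have hsubI : I.Sublist T := by
              rw [← hsplit]
              exact List.sublist_append_left _ _
            have hsubseg : I.Sublist (p :: T) := hsubI.trans (List.sublist_cons_self _ _)
            have hpwI : (pvKeys I).Pairwise (· < ·) := hpwT.sublist (hsubI.map Prod.fst)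
            have hlenI : I.length ≤ n := by
              have h1 : I.length + 1 = T.length := by
                rw [← hsplit]
                simp
              have h2 : (p :: T).length = T.length + 1 := by simp
              omega
            have ihI := ih I hlenI hpwI (fun pp hpp => hbnd pp (hsubseg.mem hpp))
            rw [hscan, if_neg hc1, if_neg hc2, ← hT,
              show (q :: rest).dropLast = I from rfl, ihI]
            have hkI_bnd : ∀ e ∈ pvKeys I, p.1 < e ∧ e < b.1 := by
              intro e he
              exact ⟨hpk e ((hkT ▸ List.mem_append_left _ he : e ∈ pvKeys T)), hkIb e he⟩
            have hsp : (PySem.Int.mod m 2 = 0 ∧ PySem.Int.floordiv m 2 ∈ pvKeys (p :: T)) ↔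
                (PySem.Int.mod m 2 = 0 ∧ PySem.Int.floordiv m 2 ∈ pvKeys I) := by
              rw [hmod2, hfd2, hkseg]
              constructor
              · rintro ⟨he, hmem⟩
                rcases List.mem_cons.mp hmem with h | h
                · omega
                · rcases List.mem_append.mp h with h | h
                  · exact ⟨he, h⟩
                  · simp only [List.mem_cons, List.not_mem_nil, or_false] at h
                    omega
              · rintro ⟨he, hmem⟩
                exact ⟨he, List.mem_cons_of_mem _ (List.mem_append_left _ hmem)⟩
            rw [if_congr hsp rfl rfl]
            have hins : pvIdxSet (pvKeys (p :: T)) m = insert p.1 (pvIdxSet (pvKeys I) m) := by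
              rw [hkseg, pvIdxSet_cons _ _ _ h2p, pvIdxSet_snoc _ _ _ h2b,
                min_eq_left (by omega), min_eq_right (by omega),
                show m - b.1 = p.1 by omega, Finset.insert_idem]
            have hnotin : p.1 ∉ pvIdxSet (pvKeys I) m := by
              intro hmem
              obtain ⟨v, hv, h2v, hminv⟩ := mem_pvIdxSet.mp hmem
              have := hkI_bnd v hv
              rcases min_cases v (m - v) with ⟨he, _⟩ | ⟨he, _⟩ <;> omega
            rw [hins, Finset.sum_insert hnotin]
            have hlkb : pvLk (p :: T) b.1 = b.2 := by
              rw [show pvLk (p :: T) b.1 = pvLk T b.1 from by simp [pvLk, if_neg (by omega : ¬(p.1 = b.1))],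
                ← hsplit, pvLk_append_singleton,
                if_neg (fun hmem => by have := hkIb _ hmem; omega), if_pos rfl]
            have hterm : max (pvLk (p :: T) p.1) (pvLk (p :: T) (m - p.1)) = max p.2 b.2 := by
              rw [show pvLk (p :: T) p.1 = p.2 from by simp [pvLk],
                show m - p.1 = b.1 by omega, hlkb]
            rw [hterm]
            have hcongr : ∀ r ∈ pvIdxSet (pvKeys I) m,
                max (pvLk (p :: T) r) (pvLk (p :: T) (m - r))
                  = max (pvLk I r) (pvLk I (m - r)) := by
              intro r hmem
              obtain ⟨v, hv, h2v, hminv⟩ := mem_pvIdxSet.mp hmem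
              have hvb := hkI_bnd v hv
              have hrv : r ≤ v := by
                rcases min_cases v (m - v) with ⟨he, _⟩ | ⟨he, _⟩ <;> omega
              have hrb : r < b.1 := by omega
              have hrp : p.1 ≠ r := fun he => hnotin (he ▸ hmem)
              have hmrp : p.1 ≠ m - r := by
                intro he
                omega
              have hmrb : b.1 ≠ m - r := by
                intro he
                exact hrp (by omega)
              have e1 : pvLk (p :: T) r = pvLk I r := by
                rw [show pvLk (p :: T) r = pvLk T r from by simp [pvLk, if_neg hrp],
                  ← hsplit, pvLk_append_singleton]
                by_cases hmm : r ∈ pvKeys I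
                · rw [if_pos hmm]
                · rw [if_neg hmm, if_neg (by omega), pvLk_not_mem _ _ hmm]
              have e2 : pvLk (p :: T) (m - r) = pvLk I (m - r) := by
                rw [show pvLk (p :: T) (m - r) = pvLk T (m - r) from by simp [pvLk, if_neg hmrp],
                  ← hsplit, pvLk_append_singleton]
                by_cases hmm : (m - r) ∈ pvKeys I
                · rw [if_pos hmm]
                · rw [if_neg hmm, if_neg hmrb, pvLk_not_mem _ _ hmm]
              rw [e1, e2]
            rw [Finset.sum_congr rfl hcongr]
            ring

-- widening a key-image index sum to the full range [1, ⌈m/2⌉): missing indices have empty buckets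
theorem pv_ext_B (q : List Int) (m : Int) (hm : 0 < m) (keys : List Int)
    (hks : ∀ v, v ∈ keys ↔ (v ∈ q ∧ v ≠ 0))
    (hbnd : ∀ v ∈ keys, 0 < v ∧ v < m) :
    ∑ r ∈ pvIdxSet keys m, pvM q m r
      = ∑ r ∈ (PySem.List.pyRange 1 (PySem.Int.floordiv (m + 1) 2) 1).toFinset, pvM q m r := by
  have hfd : PySem.Int.floordiv (m + 1) 2 = (m + 1) / 2 :=
    PySem.Int.floordiv_eq_ediv_of_pos (by omega)
  apply Finset.sum_subset
  · intro r hr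
    obtain ⟨v, hv, h2v, hminv⟩ := mem_pvIdxSet.mp hr
    have hb := hbnd v hv
    simp only [List.mem_toFinset, PySem.List.mem_pyRange_one]
    rw [hfd]
    rcases min_cases v (m - v) with ⟨he, _⟩ | ⟨he, _⟩ <;> omega
  · intro r hrT hrI
    simp only [List.mem_toFinset, PySem.List.mem_pyRange_one] at hrT
    rw [hfd] at hrT
    have hrb : 1 ≤ r ∧ 2 * r < m := by omega
    have h1 : q.count r = 0 := by
      by_contra hne
      have hrq : r ∈ q := List.count_pos_iff.mp (by omega)
      have hrk : r ∈ keys := (hks r).mpr ⟨hrq, by omega⟩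
      exact hrI (mem_pvIdxSet.mpr ⟨r, hrk, by omega, min_eq_left (by omega)⟩)
    have h2 : q.count (m - r) = 0 := by
      by_contra hne
      have hrq : (m - r) ∈ q := List.count_pos_iff.mp (by omega)
      have hrk : (m - r) ∈ keys := (hks (m - r)).mpr ⟨hrq, by omega⟩
      exact hrI (mem_pvIdxSet.mpr ⟨m - r, hrk, by omega,
        by rw [show m - (m - r) = r by ring]; exact min_eq_right (by omega)⟩)
    unfold pvM
    rw [h1, h2]
    simp

-- B's port evaluates to the canonical three-part form
theorem pv_alt_eq (myList : List Int) (k : Int) (hk : k ≠ 0) :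
    get_max_non_divisible_subset_alt myList k =
      (if (0:Int) ∈ pvRL myList |k| then 1 else 0)
      + (if PySem.Int.mod |k| 2 = 0 ∧ PySem.Int.floordiv |k| 2 ∈ pvRL myList |k| then 1 else 0)
      + ∑ r ∈ (PySem.List.pyRange 1 (PySem.Int.floordiv (|k| + 1) 2) 1).toFinset,
          pvM (pvRL myList |k|) |k| r := by
  have hm : (0:Int) < |k| := abs_pos.mpr hk
  simp only [get_max_non_divisible_subset_alt]
  set m := |k| with hmdef
  set q : List Int := myList.map (fun x => PySem.Int.mod x m) with hqdef
  have hqRL : pvRL myList m = q := rfl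
  rw [hqRL]
  set rs := PySem.List.sorted q (fun r => r) false with hrsdef
  have hperm : rs.Perm q := PySem.List.sorted_perm q (fun r => r) false
  have hsort : rs.Pairwise (· ≤ ·) := by
    have := PySem.List.sorted_pairwise (xs := q) (key := fun r => r)
    simpa using this
  have hcount : ∀ v, rs.count v = q.count v := fun v => hperm.count_eq v
  have hmemq : ∀ v : Int, v ∈ rs ↔ v ∈ q := fun v => hperm.mem_iff
  have hbnds : ∀ v ∈ rs, 0 ≤ v ∧ v < m := by
    intro v hv
    obtain ⟨x, -, rfl⟩ := List.mem_map.mp ((hmemq v).mp hv)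
    exact ⟨PySem.Int.mod_nonneg x hm, PySem.Int.mod_lt x hm⟩
  have hruns : pvRleLoop rs (rs.length + 1) 0 [] = pvRLE rs := by
    have h := pvRleLoop_spec rs (rs.length + 1) 0 [] (by omega) (le_refl 0)
    simpa using h
  obtain ⟨hKpw, hKmem, hKlk⟩ := pvRLE_props rs.length rs (le_refl _) hsort
  have hKnd : (pvKeys (pvRLE rs)).Nodup := hKpw.imp (fun h => ne_of_lt h)
  have hval : ∀ p ∈ pvRLE rs, p.2 = (rs.count p.1 : Int) := by
    intro p hp
    rw [← hKlk p.1]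
    exact (pvLk_mem_nodup (pvRLE rs) hKnd p hp).symm
  have hkeybnd : ∀ v ∈ pvKeys (pvRLE rs), 0 ≤ v ∧ v < m := by
    intro v hv
    exact hbnds v ((hKmem v).mp hv)
  -- the canonical range sum, with counts over rs replaced by counts over q
  rw [hruns]
  set runs := pvRLE rs with hrunsdef
  have hpost : ∀ st : Int × Int × Int,
      (if st.2.1 = st.2.2 then
        st.1 + (if PySem.Int.mod (2 * (PySem.List.pyGetD runs st.2.1 (0, 0)).1) m = 0 then 1
                else (PySem.List.pyGetD runs st.2.1 (0, 0)).2)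
      else st.1) = pvPost runs m st := fun st => rfl
  have hseg_all : pvSeg runs 0 ((runs.length : Int) - 1) = runs := by
    unfold pvSeg
    have h1 : ((0:Int)).toNat = 0 := rfl
    have h2 : ((runs.length : Int) - 1 + 1 - 0).toNat = runs.length := by omega
    rw [h1, h2, List.drop_zero, List.take_length]
  by_cases h0 : 0 ≤ (runs.length : Int) - 1 ∧ (PySem.List.pyGetD runs 0 (0, 0)).1 = 0
  · rw [if_pos h0]
    rw [show (((1:Int),(1:Int)) : Int × Int).2 = 1 from rfl,
      show (((1:Int),(1:Int)) : Int × Int).1 = 1 from rfl]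
    have hlen1 : 1 ≤ runs.length := by omega
    obtain ⟨r0, rt, hr⟩ : ∃ r0 rt, runs = r0 :: rt := by
      cases hc : runs with
      | nil =>
        rw [hc] at hlen1
        simp at hlen1
      | cons a bb => exact ⟨a, bb, rfl⟩
    · have hhead : (PySem.List.pyGetD runs 0 (0, 0)) = r0 := by
        rw [hr]
        exact PySem.List.pyGetD_zero_cons _ _ _
      have hr0 : r0.1 = 0 := by
        rw [hhead] at h0
        exact h0.2
      have hseg_tail : pvSeg runs 1 ((runs.length : Int) - 1) = rt := by
        unfold pvSeg
        have h1 : ((1:Int)).toNat = 1 := rfl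
        have h2 : ((runs.length : Int) - 1 + 1 - 1).toNat = runs.length - 1 := by omega
        rw [h1, h2, hr]
        simp
      rw [hpost, pv_twoPtr_scan runs m (runs.length + 1) 1
        ((runs.length : Int) - 1) 1 (by omega) (by omega) (by omega), hseg_tail]
      -- facts about the tail
      have hkcons : pvKeys runs = r0.1 :: pvKeys rt := by rw [hr]; rfl
      have hpwrt : (pvKeys rt).Pairwise (· < ·) := by
        have := hKpw
        rw [hkcons] at this
        exact (List.pairwise_cons.mp this).2
      have hgt0 : ∀ e ∈ pvKeys rt, 0 < e := by
        have := hKpw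
        rw [hkcons] at this
        intro e he
        have := (List.pairwise_cons.mp this).1 e he
        omega
      have hmemrt : ∀ v : Int, v ∈ pvKeys rt ↔ (v ∈ q ∧ v ≠ 0) := by
        intro v
        constructor
        · intro hv
          have hvruns : v ∈ pvKeys runs := by rw [hkcons]; exact List.mem_cons_of_mem _ hv
          refine ⟨(hmemq v).mp ((hKmem v).mp hvruns), ?_⟩
          have := hgt0 v hv
          omega
        · rintro ⟨hvq, hv0⟩
          have : v ∈ pvKeys runs := (hKmem v).mpr ((hmemq v).mpr hvq)
          rw [hkcons] at this
          rcases List.mem_cons.mp this with h | h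
          · omega
          · exact h
      have hbndrt : ∀ p ∈ rt, 0 < p.1 ∧ p.1 < m ∧ 0 < p.2 := by
        intro p hp
        have hpruns : p ∈ runs := by rw [hr]; exact List.mem_cons_of_mem _ hp
        have hkey : p.1 ∈ pvKeys rt := List.mem_map.mpr ⟨p, hp, rfl⟩
        have h1 := hgt0 p.1 hkey
        have h2 := (hkeybnd p.1 (List.mem_map.mpr ⟨p, hpruns, rfl⟩)).2
        have h3 : p.2 = (rs.count p.1 : Int) := hval p hpruns
        have h4 : p.1 ∈ rs := (hKmem p.1).mp (List.mem_map.mpr ⟨p, hpruns, rfl⟩)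
        have h5 : 0 < rs.count p.1 := List.count_pos_iff.mpr h4
        refine ⟨h1, h2, by omega⟩
      rw [pvScan_sum m hm rt.length rt (le_refl _) hpwrt hbndrt]
      -- lookups in the tail are counts
      have hlkrt : ∀ v : Int, v ≠ 0 → pvLk rt v = (q.count v : Int) := by
        intro v hv0
        have : pvLk runs v = (rs.count v : Int) := hKlk v
        rw [hr] at this
        simp only [pvLk, if_neg (fun hh : r0.1 = v => hv0 (by omega))] at this
        rw [this, hcount]
      have hsum : (∑ r ∈ pvIdxSet (pvKeys rt) m, max (pvLk rt r) (pvLk rt (m - r)))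
          = ∑ r ∈ pvIdxSet (pvKeys rt) m, pvM q m r := by
        refine Finset.sum_congr rfl (fun r hrmem => ?_)
        obtain ⟨v, hv, h2v, hminv⟩ := mem_pvIdxSet.mp hrmem
        have hvb : 0 < v ∧ v < m := by
          have h1 := hgt0 v hv
          have : v ∈ pvKeys runs := by rw [hkcons]; exact List.mem_cons_of_mem _ hv
          exact ⟨h1, (hkeybnd v this).2⟩
        have hrb : 1 ≤ r ∧ r < m := by
          rcases min_cases v (m - v) with ⟨he, _⟩ | ⟨he, _⟩ <;> omega
        unfold pvM
        rw [hlkrt r (by omega), hlkrt (m - r) (by omega)]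
      rw [hsum, pv_ext_B q m hm (pvKeys rt) hmemrt
        (fun v hv => ⟨hgt0 v hv, (hkeybnd v (by rw [hkcons]; exact List.mem_cons_of_mem _ hv)).2⟩)]
      -- the three pieces
      have hzq : (0:Int) ∈ q := by
        have : r0.1 ∈ pvKeys runs := by rw [hkcons]; exact List.mem_cons_self
        have := (hmemq r0.1).mp ((hKmem r0.1).mp this)
        rwa [hr0] at this
      rw [if_pos hzq]
      have hspiff : (PySem.Int.mod m 2 = 0 ∧ PySem.Int.floordiv m 2 ∈ pvKeys rt) ↔
          (PySem.Int.mod m 2 = 0 ∧ PySem.Int.floordiv m 2 ∈ q) := by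
        have hdm := PySem.Int.floordiv_mul_add_mod m 2
        constructor
        · rintro ⟨he, hmem⟩
          exact ⟨he, ((hmemrt _).mp hmem).1⟩
        · rintro ⟨he, hmem⟩
          exact ⟨he, (hmemrt _).mpr ⟨hmem, by omega⟩⟩
      rw [if_congr hspiff rfl rfl]
      ring
  · rw [if_neg h0]
    rw [show (((0:Int),(0:Int)) : Int × Int).2 = 0 from rfl,
      show (((0:Int),(0:Int)) : Int × Int).1 = 0 from rfl]
    rw [hpost, pv_twoPtr_scan runs m (runs.length + 1) 0
      ((runs.length : Int) - 1) 0 (by omega) (by omega) (by omega), hseg_all]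
    by_cases hnil : runs = []
    · have hr := hnil
      have hrsnil : rs = [] := by
        cases hrs2 : rs with
        | nil => rfl
        | cons v t =>
          exfalso
          have h1 : pvRLE rs = [] := hrunsdef.symm.trans hr
          rw [hrs2] at h1
          simp [pvRLE] at h1
      have hqnil : q = [] := by
        have h2 := hperm
        rw [hrsnil] at h2
        exact h2.symm.eq_nil
      rw [hqnil]
      have hsum0 : (∑ r ∈ (PySem.List.pyRange 1 (PySem.Int.floordiv (m + 1) 2) 1).toFinset,
          pvM ([] : List Int) m r) = 0 :=
        Finset.sum_eq_zero (fun r _ => by unfold pvM; simp)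
      rw [hsum0, hr]
      simp [pvScan]
    · obtain ⟨r0, rt, hr⟩ : ∃ r0 rt, runs = r0 :: rt := by
        cases hc : runs with
        | nil => exact absurd hc hnil
        | cons a bb => exact ⟨a, bb, rfl⟩
      have hhead : (PySem.List.pyGetD runs 0 (0, 0)) = r0 := by
        rw [hr]
        exact PySem.List.pyGetD_zero_cons _ _ _
      have hlen1 : 1 ≤ runs.length := by rw [hr]; simp
      have hr0 : r0.1 ≠ 0 := by
        intro hh
        exact h0 ⟨by omega, by rw [hhead]; exact hh⟩
      have hkcons : pvKeys runs = r0.1 :: pvKeys rt := by rw [hr]; rfl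
      have h0notin : (0:Int) ∉ pvKeys runs := by
        intro hmem0
        rw [hkcons] at hmem0
        rcases List.mem_cons.mp hmem0 with h | h
        · exact hr0 h.symm
        · have := hKpw
          rw [hkcons] at this
          have hlt := (List.pairwise_cons.mp this).1 0 h
          have hge := (hkeybnd r0.1 (by rw [hkcons]; exact List.mem_cons_self)).1
          omega
      have hbndall : ∀ p ∈ runs, 0 < p.1 ∧ p.1 < m ∧ 0 < p.2 := by
        intro p hp
        have hkey : p.1 ∈ pvKeys runs := List.mem_map.mpr ⟨p, hp, rfl⟩
        have h2 := hkeybnd p.1 hkey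
        have h1 : 0 < p.1 := by
          rcases lt_or_eq_of_le h2.1 with h | h
          · exact h
          · exact absurd (h ▸ hkey) h0notin
        have h3 : p.2 = (rs.count p.1 : Int) := hval p hp
        have h4 : p.1 ∈ rs := (hKmem p.1).mp hkey
        have h5 : 0 < rs.count p.1 := List.count_pos_iff.mpr h4
        exact ⟨h1, h2.2, by omega⟩
      rw [pvScan_sum m hm runs.length runs (le_refl _) hKpw hbndall]
      have hsum : (∑ r ∈ pvIdxSet (pvKeys runs) m, max (pvLk runs r) (pvLk runs (m - r)))
          = ∑ r ∈ pvIdxSet (pvKeys runs) m, pvM q m r := by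
        refine Finset.sum_congr rfl (fun r _ => ?_)
        unfold pvM
        rw [hKlk, hKlk, hcount, hcount]
      have hks : ∀ v : Int, v ∈ pvKeys runs ↔ (v ∈ q ∧ v ≠ 0) := by
        intro v
        constructor
        · intro hv
          refine ⟨(hmemq v).mp ((hKmem v).mp hv), fun hh => h0notin (hh ▸ hv)⟩
        · rintro ⟨hvq, -⟩
          exact (hKmem v).mpr ((hmemq v).mpr hvq)
      rw [hsum, pv_ext_B q m hm (pvKeys runs) hks (fun v hv => by
        have h2 := hkeybnd v hv
        have h1 : 0 < v := by
          rcases lt_or_eq_of_le h2.1 with h | h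
          · exact h
          · exact absurd (h ▸ hv) h0notin
        exact ⟨h1, h2.2⟩)]
      have hzq : (0:Int) ∉ q := by
        intro hh
        exact h0notin ((hKmem 0).mpr ((hmemq 0).mpr hh))
      rw [if_neg hzq]
      have hspiff : (PySem.Int.mod m 2 = 0 ∧ PySem.Int.floordiv m 2 ∈ pvKeys runs) ↔
          (PySem.Int.mod m 2 = 0 ∧ PySem.Int.floordiv m 2 ∈ q) := by
        constructor
        · rintro ⟨he, hmem⟩
          exact ⟨he, (hmemq _).mp ((hKmem _).mp hmem)⟩
        · rintro ⟨he, hmem⟩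
          exact ⟨he, (hKmem _).mpr ((hmemq _).mpr hmem)⟩
      rw [if_congr hspiff rfl rfl]
      ring

-- A's port evaluates to the same canonical three-part form (conditions in signed form)
theorem pv_A_eq (myList : List Int) (k : Int) (hk : k ≠ 0) :
    get_max_non_divisible_subset myList k =
      (if PySem.Int.mod k 2 = 0 ∧ PySem.Int.floordiv k 2 ∈ pvRL myList k then 1 else 0)
      + (if (0:Int) ∈ pvRL myList k then 1 else 0)
      + ∑ r ∈ (PySem.List.pyRange 1 (PySem.Int.floordiv (|k| + 1) 2) 1).toFinset,
          pvM (pvRL myList |k|) |k| r := by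
  simp only [get_max_non_divisible_subset]
  have hd0 : (myList.map fun x => PySem.Int.mod x k).foldl
      (fun d r => if d.contains r = true then d.modify r 0 (· + 1) else d.insert r 1)
      PySem.Dict.empty = PySem.Dict.counter (pvRL myList k) := by
    rw [PySem.List.foldl_congr_mem _ _ (fun d r => d.modify r 0 (· + 1)) _ ?_]
    · exact (PySem.Dict.counter_eq_foldl _).symm
    · intro d r _
      by_cases h : d.contains r = true
      · rw [if_pos h]
      · rw [if_neg h]
        show d.insert r 1 = d.insert r (d.getD r 0 + 1)
        rw [PySem.Dict.getD_of_not_contains d 0 (by simpa using h)]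
        norm_num
  rw [hd0]
  have hcontHA : (PySem.Dict.counter (pvRL myList k)).contains (PySem.Int.floordiv k 2) = true
      ↔ PySem.Int.floordiv k 2 ∈ pvRL myList k := by
    rw [PySem.Dict.contains_counter]; exact List.contains_iff_mem
  have hcont0A : (PySem.Dict.counter (pvRL myList k)).contains 0 = true ↔ (0:Int) ∈ pvRL myList k := by
    rw [PySem.Dict.contains_counter]; exact List.contains_iff_mem
  have hfin : ∀ (d : PySem.Dict Int Int) (K : List Int),
      d.items = K.map (fun c => (c, ((pvRL myList k).count c : Int))) → K.Nodup →
      (∀ c, c ∈ K ↔ c ∈ pvRL myList k ∧ c ≠ 0 ∧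
        ¬(PySem.Int.mod k 2 = 0 ∧ c = PySem.Int.floordiv k 2)) →
      pvGetSumExceptForValue d k
        = ∑ r ∈ (PySem.List.pyRange 1 (PySem.Int.floordiv (|k| + 1) 2) 1).toFinset,
            pvM (pvRL myList |k|) |k| r := by
    intro d K h1 h2 h3
    exact (pv_A_sum myList k hk d K h1 h2 h3).trans (pv_sum_ext myList k hk K h3)
  by_cases hA : PySem.Int.mod k 2 = 0 ∧
      (PySem.Dict.counter (pvRL myList k)).contains (PySem.Int.floordiv k 2) = true
  · simp only [if_pos hA]
    have hhalfmem : PySem.Int.mod k 2 = 0 ∧ PySem.Int.floordiv k 2 ∈ pvRL myList k :=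
      ⟨hA.1, hcontHA.mp hA.2⟩
    rw [if_pos hhalfmem]
    have hne0h : PySem.Int.floordiv k 2 ≠ 0 := by
      have hdm := PySem.Int.floordiv_mul_add_mod k 2
      have := hA.1
      omega
    have hcd1 : ((PySem.Dict.counter (pvRL myList k)).erase (PySem.Int.floordiv k 2)).contains 0 = true
        ↔ (0:Int) ∈ pvRL myList k := by
      rw [pv_contains_erase]
      constructor
      · rintro ⟨h1, -⟩; exact hcont0A.mp h1
      · intro h1; exact ⟨hcont0A.mpr h1, fun h => hne0h h.symm⟩
    by_cases hB : ((PySem.Dict.counter (pvRL myList k)).erase (PySem.Int.floordiv k 2)).contains 0 = true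
    · simp only [if_pos hB]
      rw [if_pos (hcd1.mp hB)]
      have hit : (((PySem.Dict.counter (pvRL myList k)).erase (PySem.Int.floordiv k 2)).erase 0).items
          = (((PySem.Set.ofList (pvRL myList k)).filter
                (fun c => !(c == PySem.Int.floordiv k 2))).filter (fun c => !(c == (0:Int)))).map
              (fun c => (c, ((pvRL myList k).count c : Int))) := by
        show (((PySem.Dict.counter (pvRL myList k)).items.filter
            (fun p => !(p.1 == PySem.Int.floordiv k 2))).filter (fun p => !(p.1 == (0:Int)))) = _
        rw [PySem.Dict.items_counter, List.filter_map, List.filter_map]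
        rfl
      rw [hfin _ _ hit
        (List.Nodup.filter _ (List.Nodup.filter _ (PySem.Set.nodup_ofList _)))
        (by
          intro c
          simp only [List.mem_filter, PySem.Set.mem_ofList, Bool.not_eq_eq_eq_not, Bool.not_true,
            beq_eq_false_iff_ne, ne_eq]
          constructor
          · rintro ⟨⟨hc1, hc2⟩, hc3⟩
            exact ⟨hc1, hc3, fun h => hc2 h.2⟩
          · rintro ⟨hc1, hc2, hc3⟩
            exact ⟨⟨hc1, fun h => hc3 ⟨hA.1, h⟩⟩, hc2⟩)]
      ring
    · simp only [if_neg hB]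
      have h0no : (0:Int) ∉ pvRL myList k := fun h => hB (hcd1.mpr h)
      rw [if_neg h0no]
      have hit : (((PySem.Dict.counter (pvRL myList k)).erase (PySem.Int.floordiv k 2))).items
          = ((PySem.Set.ofList (pvRL myList k)).filter
                (fun c => !(c == PySem.Int.floordiv k 2))).map
              (fun c => (c, ((pvRL myList k).count c : Int))) := by
        show ((PySem.Dict.counter (pvRL myList k)).items.filter
            (fun p => !(p.1 == PySem.Int.floordiv k 2))) = _
        rw [PySem.Dict.items_counter, List.filter_map]
        rfl
      rw [hfin _ _ hit
        (List.Nodup.filter _ (PySem.Set.nodup_ofList _))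
        (by
          intro c
          simp only [List.mem_filter, PySem.Set.mem_ofList, Bool.not_eq_eq_eq_not, Bool.not_true,
            beq_eq_false_iff_ne, ne_eq]
          constructor
          · rintro ⟨hc1, hc2⟩
            exact ⟨hc1, fun h => h0no (h ▸ hc1), fun h => hc2 h.2⟩
          · rintro ⟨hc1, hc2, hc3⟩
            exact ⟨hc1, fun h => hc3 ⟨hA.1, h⟩⟩)]
      ring
  · simp only [if_neg hA]
    rw [if_neg (fun hh : PySem.Int.mod k 2 = 0 ∧ PySem.Int.floordiv k 2 ∈ pvRL myList k =>
      hA ⟨hh.1, hcontHA.mpr hh.2⟩)]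
    have hnohalf : ∀ c, c ∈ pvRL myList k →
        ¬(PySem.Int.mod k 2 = 0 ∧ c = PySem.Int.floordiv k 2) := by
      rintro c hc ⟨h1, h2⟩
      exact hA ⟨h1, hcontHA.mpr (h2 ▸ hc)⟩
    by_cases hB : (PySem.Dict.counter (pvRL myList k)).contains 0 = true
    · simp only [if_pos hB]
      rw [if_pos (hcont0A.mp hB)]
      have hit : ((PySem.Dict.counter (pvRL myList k)).erase 0).items
          = ((PySem.Set.ofList (pvRL myList k)).filter (fun c => !(c == (0:Int)))).map
              (fun c => (c, ((pvRL myList k).count c : Int))) := by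
        show ((PySem.Dict.counter (pvRL myList k)).items.filter (fun p => !(p.1 == (0:Int)))) = _
        rw [PySem.Dict.items_counter, List.filter_map]
        rfl
      rw [hfin _ _ hit
        (List.Nodup.filter _ (PySem.Set.nodup_ofList _))
        (by
          intro c
          simp only [List.mem_filter, PySem.Set.mem_ofList, Bool.not_eq_eq_eq_not, Bool.not_true,
            beq_eq_false_iff_ne, ne_eq]
          constructor
          · rintro ⟨hc1, hc2⟩
            exact ⟨hc1, hc2, hnohalf c hc1⟩
          · rintro ⟨hc1, hc2, -⟩
            exact ⟨hc1, hc2⟩)]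
    · simp only [if_neg hB]
      have h0no : (0:Int) ∉ pvRL myList k := fun h => hB (hcont0A.mpr h)
      rw [if_neg h0no]
      have hit : (PySem.Dict.counter (pvRL myList k)).items
          = (PySem.Set.ofList (pvRL myList k)).map
              (fun c => (c, ((pvRL myList k).count c : Int))) := PySem.Dict.items_counter _
      rw [hfin _ _ hit (PySem.Set.nodup_ofList _)
        (by
          intro c
          simp only [PySem.Set.mem_ofList]
          constructor
          · intro hc1
            exact ⟨hc1, fun h => h0no (h ▸ hc1), hnohalf c hc1⟩
          · rintro ⟨hc1, -, -⟩
            exact hc1)]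
      ring

-- ===== VERDICT (by name: the statement is the Claim_ definition above) =====

theorem get_max_non_divisible_subset_spec : Claim_equal_get_max_non_divisible_subset := by
  unfold Claim_equal_get_max_non_divisible_subset
  intro myList k _ hk
  unfold Pre_get_max_non_divisible_subset at hk
  unfold Spec_get_max_non_divisible_subset
  rw [pv_A_eq myList k hk, pv_alt_eq myList k hk]
  rw [if_congr (pv_half_iff myList k hk) rfl rfl, if_congr (pv_zero_iff myList k hk) rfl rfl]
  ring
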